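-- pv_equiv track=rewrite | github.com/amgarton47/IK | graphs/foundations/is_it_a_tree.py | is_it_a_tree
-- ===== SOURCE A (Python) =====
-- def is_it_a_tree(node_count, edge_start, edge_end):
--     visited = [0 for _ in range(node_count)]
--     parent = [0 for _ in range(node_count)]
--
--     # build adjacency graph from edge list
--     adj_list = [[] for _ in range(node_count)]
--     for i in range(len(edge_start)):
--         s = edge_start[i]
--         e = edge_end[i]
--
--         # if a vertex points to itself, that is a cycle
--         if s == e:
--             return False
--
--         adj_list[s].append(e)
--         adj_list[e].append(s)
--
--     # check that the number of components is 1
--     num_components = 0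
--     for i in range(node_count):
--         if not visited[i]:
--             # there is more than 1 component so we can return False early
--             if num_components > 0:
--                 return False
--             num_components += 1
--
--             # if we find a cycle in the bfs of any vertex, return false
--             if bfs(i, visited, adj_list, parent):
--                 return False
--
--     return True
--
-- def bfs(s, visited, adj_list, parent):
--     q = [s]
--     while q:
--         v = q.pop(0)
--         visited[v] = 1
--
--         for w in adj_list[v]:
--             if visited[w] == 0:
--                 q.append(w)
--                 visited[w] = 1
--                 parent[w] = v
--             else:
--                 # we have visited this neighbor before
--                 # check if it is our parent
--                 if w != parent[v]:
--                     return True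
--     return False
-- ===== SOURCE B (Python) =====
-- def is_it_a_tree(node_count, edge_start, edge_end):
--     # Union-by-relabel over the edge list: the graph is a tree iff every edge
--     # merges two distinct components and at most one component remains.
--     comp = list(range(node_count))
--     components = node_count
--     for s, e in zip(edge_start, edge_end):
--         if s == e:
--             return False
--         cs, ce = comp[s], comp[e]
--         if cs == ce:
--             return False
--         comp = [cs if c == ce else c for c in comp]
--         components -= 1
--     return components <= 1
-- ===== Notes on version B (the rewrite author's own statement) =====
-- stated objective: simpler
-- what changed: Replaces A's adjacency-list construction plus per-component BFS with parent-pointer cycle detection by a single union-by-relabel (union-find) pass over the edge list that counts remaining components (no adjacency lists, no O(n) queue pops); Pre_ restricts the edges A actually reads (those before the first self-loop edge) to readable positions with endpoints in the natural node range 0..node_count-1, excluding inputs where A raises IndexError and negative wraparound endpoints, on which A compares parent pointers by raw value rather than by node and can misreport a cycle.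
-- outside the precondition, e.g. on is_it_a_tree(3, [0, 2], [-1, 1]): A returns False, B returns True
import Mathlib
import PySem

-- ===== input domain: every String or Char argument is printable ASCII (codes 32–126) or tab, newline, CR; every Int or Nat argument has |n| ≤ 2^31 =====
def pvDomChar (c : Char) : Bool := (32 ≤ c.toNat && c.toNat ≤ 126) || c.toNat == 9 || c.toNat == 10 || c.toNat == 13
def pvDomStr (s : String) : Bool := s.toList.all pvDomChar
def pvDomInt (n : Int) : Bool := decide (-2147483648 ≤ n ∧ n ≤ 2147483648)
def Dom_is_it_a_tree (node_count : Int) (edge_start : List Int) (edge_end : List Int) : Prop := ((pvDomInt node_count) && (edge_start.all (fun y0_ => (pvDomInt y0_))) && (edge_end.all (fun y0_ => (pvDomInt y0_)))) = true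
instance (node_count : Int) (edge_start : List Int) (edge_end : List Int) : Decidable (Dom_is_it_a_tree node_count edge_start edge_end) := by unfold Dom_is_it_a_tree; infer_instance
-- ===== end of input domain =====

-- B replaces A's adjacency-list build + per-component BFS with parent-pointer cycle detection
-- by a single union-by-relabel pass over the edge list that counts remaining components (objective: simpler).

-- ===== PORT A =====

-- number of cells of `visited` that are not 1 (termination measure helper for the BFS while-loop)
def pvUnvis (l : List Int) : Nat := l.countP (fun x => decide (x ≠ 1))

-- normalisation of a successful Python index (used by the termination lemmas and the proofs below)
lemma pvIdxNorm {α : Type} (l : List α) (i : Int) (x : α) (h : PySem.List.pyGet? l i = some x) :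
    ∃ k, ∃ hk : k < l.length, l[k] = x ∧ ∀ v, PySem.List.pySetD l i v = l.set k v := by
  simp only [PySem.List.pyGet?, PySem.List.pyIdx?, PySem.List.pySetD, PySem.List.pySet?] at *
  split_ifs at h with h1 h2 h3
  · exact ⟨i.toNat, by omega, by simpa using List.getElem?_eq_some_iff.mp (by simpa using h) |>.choose_spec, fun v => by simp [h2, h1]⟩
  · simp at h
  · exact ⟨l.length - (-i).toNat, by omega, by simpa using List.getElem?_eq_some_iff.mp (by simpa using h) |>.choose_spec, fun v => by simp [h1, h3]⟩
  · simp at h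

lemma pvUnvis_pySetD_one_le (l : List Int) (i : Int) : pvUnvis (PySem.List.pySetD l i 1) ≤ pvUnvis l := by
  rcases h : PySem.List.pyGet? l i with _ | x
  · have : PySem.List.pySetD l i 1 = l := by
      simp only [PySem.List.pyGet?, PySem.List.pyIdx?, PySem.List.pySetD, PySem.List.pySet?] at *
      split_ifs at h ⊢ <;> simp_all
    simp [this]
  · obtain ⟨k, hk, hval, hset⟩ := pvIdxNorm l i x h
    rw [hset, pvUnvis, List.countP_set hk]
    simp only [pvUnvis, show (decide ((1:Int) ≠ 1)) = false from by decide, Bool.false_eq_true,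
      if_false]
    split_ifs <;> omega

lemma pvUnvis_pySetD_zero_lt (l : List Int) (i : Int) (h : PySem.List.pyGet? l i = some 0) :
    pvUnvis (PySem.List.pySetD l i 1) < pvUnvis l := by
  obtain ⟨k, hk, hval, hset⟩ := pvIdxNorm l i 0 h
  have hpos : 0 < List.countP (fun x => decide (x ≠ 1)) l := by
    have h0 : (0:Int) ∈ l := by rw [← hval]; exact l.getElem_mem hk
    exact (List.countP_pos_iff (p := fun x => decide (x ≠ 1))).mpr ⟨0, h0, by decide⟩
  rw [hset, pvUnvis, List.countP_set hk]
  simp only [pvUnvis, hval, show (decide ((1:Int) ≠ 1)) = false from by decide,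
    show (decide ((0:Int) ≠ 1)) = true from by decide, Bool.false_eq_true, if_false, if_true]
  omega

inductive PvStep where
  | fired : PvStep
  | err : PvStep
  | next : List Int → List Int → List Int → PvStep

-- the body of bfs's `for w in adj_list[v]` loop (early exits: fired = `return True`, err = IndexError)
def pvBfsInner (v : Int) (nbrs : List Int) (visited parent q : List Int) : PvStep :=
  match nbrs with
  | [] => .next visited parent q
  | w :: rest =>
    match PySem.List.pyGet? visited w with
    | none => .err
    | some x =>
      if x = 0 then
        pvBfsInner v rest (PySem.List.pySetD visited w 1) (PySem.List.pySetD parent w v) (q ++ [w])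
      else
        match PySem.List.pyGet? parent v with
        | none => .err
        | some pv => if w ≠ pv then .fired else pvBfsInner v rest visited parent q

lemma pvBfsInner_measure (v : Int) (nbrs : List Int) : ∀ visited parent q visited' parent' q',
    pvBfsInner v nbrs visited parent q = .next visited' parent' q' →
    2 * pvUnvis visited' + q'.length ≤ 2 * pvUnvis visited + q.length := by
  induction nbrs with
  | nil => intro visited parent q v' p' q' h; cases h; omega
  | cons w rest ih =>
    intro visited parent q v' p' q' h
    simp only [pvBfsInner] at h
    rcases hg : PySem.List.pyGet? visited w with _ | x <;> rw [hg] at h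
    · cases h
    · simp only at h
      split_ifs at h with hx
      · subst hx
        have h1 := ih _ _ _ _ _ _ h
        have h2 := pvUnvis_pySetD_zero_lt visited w hg
        simp only [List.length_append, List.length_cons, List.length_nil] at *
        omega
      · rcases hp : PySem.List.pyGet? parent v with _ | pv <;> rw [hp] at h
        · cases h
        · simp only at h
          split_ifs at h with hw
          · exact ih _ _ _ _ _ _ h

-- bfs's while-loop; returns (return value, visited, parent)
def pvBfs (adj : List (List Int)) (visited parent q : List Int) : Bool × List Int × List Int :=
  match q with
  | [] => (false, visited, parent)
  | v :: qt =>
    let visited1 := PySem.List.pySetD visited v 1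
    match PySem.List.pyGet? adj v with
    | none => (false, visited1, parent)
    | some nbrs =>
      match h : pvBfsInner v nbrs visited1 parent qt with
      | .fired => (true, visited1, parent)
      | .err => (false, visited1, parent)
      | .next visited2 parent2 q2 => pvBfs adj visited2 parent2 q2
termination_by 2 * pvUnvis visited + q.length
decreasing_by
  have h1 := pvBfsInner_measure v nbrs visited1 parent qt _ _ _ h
  have h2 : visited1 = PySem.List.pySetD visited v 1 := rfl
  have h3 := pvUnvis_pySetD_one_le visited v
  rw [← h2] at h3
  simp only [List.length_cons]
  omega

-- adj_list[i].append(v) (an out-of-range i is a Python IndexError, outside Pre_: the port leaves adj unchanged)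
def pvAdjAdd (adj : List (List Int)) (i v : Int) : List (List Int) :=
  match PySem.List.pyGet? adj i with
  | none => adj
  | some l => PySem.List.pySetD adj i (l ++ [v])

-- the `for i in range(len(edge_start))` build loop; none = the function exited (returned False on a
-- self-loop; the IndexError cases — edge_end shorter, endpoint out of range — lie outside Pre_)
def pvBuild (es ee : List Int) (adj : List (List Int)) : Option (List (List Int)) :=
  match es, ee with
  | [], _ => some adj
  | s :: es', e :: ee' =>
      if s = e then none
      else pvBuild es' ee' (pvAdjAdd (pvAdjAdd adj s e) e s)
  | _ :: _, [] => none

-- the `for i in range(node_count)` component loop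
def pvScan (adj : List (List Int)) : List Int → List Int → List Int → Int → Bool
  | [], _, _, _ => true
  | i :: rest, visited, parent, ncomp =>
    match PySem.List.pyGet? visited i with
    | none => false
    | some x =>
      if x = 0 then
        if ncomp > 0 then false
        else
          let r := pvBfs adj visited parent [i]
          if r.1 then false else pvScan adj rest r.2.1 r.2.2 (ncomp + 1)
      else pvScan adj rest visited parent ncomp

def is_it_a_tree (node_count : Int) (edge_start : List Int) (edge_end : List Int) : Bool :=
  let visited := List.replicate node_count.toNat (0 : Int)
  let parent := List.replicate node_count.toNat (0 : Int)
  let adj0 := List.replicate node_count.toNat ([] : List Int)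
  match pvBuild edge_start edge_end adj0 with
  | none => false
  | some adj => pvScan adj (PySem.List.pyRange 0 node_count 1) visited parent 0

-- ===== PORT B =====

-- comp = [cs if c == ce else c for c in comp]
def pvRelabel (comp : List Int) (old new : Int) : List Int :=
  comp.map (fun c => if c = old then new else c)

-- the `for s, e in zip(edge_start, edge_end)` union-by-relabel loop
def pvUF : List (Int × Int) → List Int → Int → Bool
  | [], _, components => components ≤ 1
  | (s, e) :: rest, comp, components =>
    if s = e then false
    else match PySem.List.pyGet? comp s, PySem.List.pyGet? comp e with
      | some cs, some ce =>
          if cs = ce then false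
          else pvUF rest (pvRelabel comp ce cs) (components - 1)
      | _, _ => false

def is_it_a_tree_alt (node_count : Int) (edge_start : List Int) (edge_end : List Int) : Bool :=
  pvUF (edge_start.zip edge_end) (PySem.List.pyRange 0 node_count 1) node_count

-- ===== PRECONDITION & SPEC =====

-- Pre_ restricts the edges A actually reads (those before the first self-loop edge, after which A
-- returns without reading further) to Python-readable positions and endpoints in the natural node
-- range 0..node_count-1: it excludes inputs where A raises IndexError, and negative wraparound
-- endpoints, on which A compares parent pointers by raw value rather than by node.
def Pre_is_it_a_tree (node_count : Int) (edge_start : List Int) (edge_end : List Int) : Prop :=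
  0 ≤ node_count ∧
  ∀ i, i < edge_start.length →
    (∀ j, j < i → ¬ (j < edge_end.length ∧ edge_start.getD j 0 = edge_end.getD j 0)) →
    (i < edge_end.length ∧
      (edge_start.getD i 0 = edge_end.getD i 0 ∨
        (0 ≤ edge_start.getD i 0 ∧ edge_start.getD i 0 < node_count ∧
         0 ≤ edge_end.getD i 0 ∧ edge_end.getD i 0 < node_count)))

instance (node_count : Int) (edge_start : List Int) (edge_end : List Int) : Decidable (Pre_is_it_a_tree node_count edge_start edge_end) := by
  unfold Pre_is_it_a_tree; infer_instance

def pvWitness_is_it_a_tree : Int × List Int × List Int := (2, [0], [1])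

def Spec_is_it_a_tree (node_count : Int) (edge_start : List Int) (edge_end : List Int) (out : Bool) : Prop := out = is_it_a_tree_alt node_count edge_start edge_end
instance (node_count : Int) (edge_start : List Int) (edge_end : List Int) (out : Bool) : Decidable (Spec_is_it_a_tree node_count edge_start edge_end out) := by unfold Spec_is_it_a_tree; infer_instance

-- ===== CLAIM (what is proved, stated in full; the proofs are below) =====
def Claim_equal_is_it_a_tree : Prop := ∀ (node_count : Int) (edge_start : List Int) (edge_end : List Int), Dom_is_it_a_tree node_count edge_start edge_end → Pre_is_it_a_tree node_count edge_start edge_end → Spec_is_it_a_tree node_count edge_start edge_end (is_it_a_tree node_count edge_start edge_end)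

-- ===== LEMMAS AND PROOFS =====

-- ---- abstract graph layer ----

def InR (n x : Int) : Prop := 0 ≤ x ∧ x < n

def Good (n : Int) (E : List (Int × Int)) : Prop :=
  ∀ p ∈ E, InR n p.1 ∧ InR n p.2 ∧ p.1 ≠ p.2

-- connectivity: the equivalence closure of the edge pairs (depends only on membership in E)
inductive Conn (E : List (Int × Int)) : Int → Int → Prop where
  | refl (x : Int) : Conn E x x
  | base {a b : Int} : (a, b) ∈ E → Conn E a b
  | symm {a b : Int} : Conn E a b → Conn E b a
  | trans {a b c : Int} : Conn E a b → Conn E b c → Conn E a c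

-- number of parallel instances of the undirected edge {v,w}
def cnt (E : List (Int × Int)) (v w : Int) : Nat := E.count (v, w) + E.count (w, v)

-- no edge joins two endpoints already connected by the earlier edges
def NoBad (E : List (Int × Int)) : Prop :=
  ∀ i, i < E.length → ¬ Conn (E.take i) (E.getD i (0,0)).1 (E.getD i (0,0)).2

-- some edge instance can be removed with its endpoints still connected (i.e. the graph has a cycle)
def BadErase (E : List (Int × Int)) : Prop :=
  ∃ i, i < E.length ∧ Conn (E.eraseIdx i) (E.getD i (0,0)).1 (E.getD i (0,0)).2

def AllConn (n : Int) (E : List (Int × Int)) : Prop := ∀ x, InR n x → Conn E 0 x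

lemma conn_mono {E F : List (Int × Int)} (hsub : ∀ p ∈ E, p ∈ F) {x y : Int}
    (h : Conn E x y) : Conn F x y := by
  induction h with
  | refl x => exact Conn.refl x
  | base hm => exact Conn.base (hsub _ hm)
  | symm _ ih => exact ih.symm
  | trans _ _ ih1 ih2 => exact ih1.trans ih2

lemma conn_map {E F : List (Int × Int)} (hsub : ∀ p ∈ E, Conn F p.1 p.2) {x y : Int}
    (h : Conn E x y) : Conn F x y := by
  induction h with
  | refl x => exact Conn.refl x
  | base hm => exact hsub _ hm
  | symm _ ih => exact ih.symm
  | trans _ _ ih1 ih2 => exact ih1.trans ih2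

lemma conn_nil {x y : Int} : Conn [] x y ↔ x = y := by
  constructor
  · intro h
    induction h with
    | refl x => rfl
    | base hm => simp at hm
    | symm _ ih => exact ih.symm
    | trans _ _ ih1 ih2 => exact ih1.trans ih2
  · rintro rfl; exact Conn.refl x

lemma conn_add_iff {E : List (Int × Int)} {a b x y : Int} :
    Conn (E ++ [(a, b)]) x y ↔
      Conn E x y ∨ (Conn E x a ∧ Conn E b y) ∨ (Conn E x b ∧ Conn E a y) := by
  constructor
  · intro h
    induction h with
    | refl x => exact Or.inl (Conn.refl x)
    | base hmem =>
      rcases List.mem_append.mp hmem with h | h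
      · exact Or.inl (Conn.base h)
      · simp only [List.mem_singleton, Prod.mk.injEq] at h
        obtain ⟨h1, h2⟩ := h; subst h1; subst h2
        exact Or.inr (Or.inl ⟨Conn.refl _, Conn.refl _⟩)
    | symm _ ih =>
      rcases ih with h | ⟨h1, h2⟩ | ⟨h1, h2⟩
      · exact Or.inl h.symm
      · exact Or.inr (Or.inr ⟨h2.symm, h1.symm⟩)
      · exact Or.inr (Or.inl ⟨h2.symm, h1.symm⟩)
    | trans hp hq ih1 ih2 =>
      rcases ih1 with h1 | ⟨h1a, h1b⟩ | ⟨h1a, h1b⟩ <;>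
        rcases ih2 with h2 | ⟨h2a, h2b⟩ | ⟨h2a, h2b⟩
      · exact Or.inl (h1.trans h2)
      · exact Or.inr (Or.inl ⟨h1.trans h2a, h2b⟩)
      · exact Or.inr (Or.inr ⟨h1.trans h2a, h2b⟩)
      · exact Or.inr (Or.inl ⟨h1a, h1b.trans h2⟩)
      · exact Or.inr (Or.inl ⟨h1a, h2b⟩)
      · exact Or.inl (h1a.trans h2b)
      · exact Or.inr (Or.inr ⟨h1a, h1b.trans h2⟩)
      · exact Or.inl (h1a.trans h2b)
      · exact Or.inr (Or.inr ⟨h1a, h2b⟩)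
  · intro h
    have hab : Conn (E ++ [(a, b)]) a b := Conn.base (by simp)
    have hmono : ∀ {u v : Int}, Conn E u v → Conn (E ++ [(a, b)]) u v :=
      fun h => conn_mono (fun p hp => List.mem_append_left _ hp) h
    rcases h with h | ⟨h1, h2⟩ | ⟨h1, h2⟩
    · exact hmono h
    · exact ((hmono h1).trans hab).trans (hmono h2)
    · exact ((hmono h1).trans hab.symm).trans (hmono h2)

lemma conn_add_of_conn {E : List (Int × Int)} {a b : Int} (hab : Conn E a b) {x y : Int} :
    Conn (E ++ [(a, b)]) x y ↔ Conn E x y := by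
  constructor
  · intro h
    rcases conn_add_iff.mp h with h | ⟨h1, h2⟩ | ⟨h1, h2⟩
    · exact h
    · exact (h1.trans hab).trans h2
    · exact (h1.trans hab.symm).trans h2
  · exact fun h => conn_mono (fun p hp => List.mem_append_left _ hp) h

lemma conn_eraseIdx_iff {E : List (Int × Int)} {i : Nat} (hi : i < E.length)
    (hconn : Conn (E.eraseIdx i) (E.getD i (0,0)).1 (E.getD i (0,0)).2) :
    ∀ x y, Conn E x y ↔ Conn (E.eraseIdx i) x y := by
  intro x y
  have hd : E.getD i (0,0) = E[i] := List.getD_eq_getElem E (0,0) hi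
  have hperm : E.Perm (E[i] :: E.eraseIdx i) :=
    (List.getElem_cons_eraseIdx_perm hi).symm
  constructor
  · intro h
    refine conn_map (fun p hp => ?_) h
    rcases List.mem_cons.mp (hperm.mem_iff.mp hp) with h1 | h1
    · subst h1; rw [hd] at hconn
      exact (show Conn (E.eraseIdx i) E[i].1 E[i].2 from hconn)
    · exact Conn.base h1
  · exact fun h => conn_mono (fun p hp => List.mem_of_mem_eraseIdx hp) h

lemma noBad_snoc {E : List (Int × Int)} {p : Int × Int} :
    NoBad (E ++ [p]) ↔ NoBad E ∧ ¬ Conn E p.1 p.2 := by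
  have hl1 : ∀ i, i < E.length →
      (E ++ [p]).take i = E.take i ∧ (E ++ [p]).getD i (0,0) = E.getD i (0,0) := by
    intro i hi
    refine ⟨List.take_append_of_le_length (by omega), ?_⟩
    simp only [List.getD, List.getElem?_append_left hi]
  have hl2 : (E ++ [p]).take E.length = E ∧ (E ++ [p]).getD E.length (0,0) = p := by
    refine ⟨by simp, ?_⟩
    simp only [List.getD, List.getElem?_append_right (le_refl _)]
    simp
  constructor
  · intro h
    refine ⟨fun i hi hc => h i (by simp; omega) ?_, fun hc => h E.length (by simp) ?_⟩
    · rw [(hl1 i hi).1, (hl1 i hi).2]; exact hc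
    · rw [hl2.1, hl2.2]; exact hc
  · rintro ⟨h1, h2⟩ i hi hc
    simp only [List.length_append, List.length_singleton] at hi
    rcases Nat.lt_or_ge i E.length with h | h
    · rw [(hl1 i h).1, (hl1 i h).2] at hc; exact h1 i h hc
    · have : i = E.length := by omega
      subst this
      rw [hl2.1, hl2.2] at hc; exact h2 hc

-- ---- component labelling (proof-side mirror of B's relabel step) ----

def cstep (comp : List Int) (p : Int × Int) : List Int :=
  if comp.getD p.1.toNat 0 = comp.getD p.2.toNat 0 then comp
  else pvRelabel comp (comp.getD p.2.toNat 0) (comp.getD p.1.toNat 0)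

def compOf (n : Int) (E : List (Int × Int)) : List Int :=
  E.foldl cstep (PySem.List.pyRange 0 n 1)

def kap (comp : List Int) : Nat := comp.toFinset.card

-- comp is a labelling of 0..n-1 whose label-equality is exactly Conn E
def Partn (n : Int) (comp : List Int) (E : List (Int × Int)) : Prop :=
  comp.length = n.toNat ∧
  ∀ x y, InR n x → InR n y →
    (comp.getD x.toNat 0 = comp.getD y.toNat 0 ↔ Conn E x y)

lemma partn_init (n : Int) : Partn n (PySem.List.pyRange 0 n 1) [] := by
  have hlen : (PySem.List.pyRange 0 n 1).length = n.toNat := by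
    rw [PySem.List.length_pyRange_one]; simp
  have hget : ∀ x : Int, InR n x → (PySem.List.pyRange 0 n 1).getD x.toNat 0 = x := by
    intro x hx
    obtain ⟨hx0, hx1⟩ := hx
    have hlt : x.toNat < (PySem.List.pyRange 0 n 1).length := by
      rw [hlen]; omega
    rw [List.getD_eq_getElem _ 0 hlt, PySem.List.getElem_pyRange_one]
    simp [Int.toNat_of_nonneg hx0]
  refine ⟨hlen, fun x y hx hy => ?_⟩
  rw [hget x hx, hget y hy, conn_nil]

lemma pvRelabelAux {Lx Ly La Lb : Int} (hab : La ≠ Lb) :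
    ((if Lx = Lb then La else Lx) = (if Ly = Lb then La else Ly)) ↔
      (Lx = Ly ∨ (Lx = La ∧ Lb = Ly) ∨ (Lx = Lb ∧ La = Ly)) := by
  split_ifs with h1 h2 h2 <;> omega

lemma partn_cstep {n : Int} {comp : List Int} {E : List (Int × Int)} {p : Int × Int}
    (h : Partn n comp E) (hp : InR n p.1) (hq : InR n p.2) :
    Partn n (cstep comp p) (E ++ [p]) := by
  obtain ⟨a, b⟩ := p
  obtain ⟨hlen, hiff⟩ := h
  by_cases hce : comp.getD a.toNat 0 = comp.getD b.toNat 0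
  · have hconn : Conn E a b := (hiff a b hp hq).mp hce
    rw [cstep, if_pos hce]
    exact ⟨hlen, fun x y hx hy => by
      rw [conn_add_of_conn hconn]; exact hiff x y hx hy⟩
  · have hnconn : ¬ Conn E a b := fun hc => hce ((hiff a b hp hq).mpr hc)
    rw [cstep, if_neg hce]
    have hrel : ∀ x : Int, InR n x →
        (pvRelabel comp (comp.getD b.toNat 0) (comp.getD a.toNat 0)).getD x.toNat 0 =
          if comp.getD x.toNat 0 = comp.getD b.toNat 0 then comp.getD a.toNat 0
          else comp.getD x.toNat 0 := by
      intro x hx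
      obtain ⟨hx0, hx1⟩ := hx
      have hlt : x.toNat < comp.length := by rw [hlen]; omega
      rw [pvRelabel, List.getD_eq_getElem _ 0 (by simpa using hlt), List.getElem_map,
        List.getD_eq_getElem _ 0 hlt]
    constructor
    · simp [pvRelabel, hlen]
    · intro x y hx hy
      rw [hrel x hx, hrel y hy, conn_add_iff, ← hiff x y hx hy, ← hiff x a hx hp,
        ← hiff b y hq hy, ← hiff x b hx hq, ← hiff a y hp hy]
      exact pvRelabelAux hce

lemma partn_compOf {n : Int} {E : List (Int × Int)} (hG : Good n E) :
    Partn n (compOf n E) E := by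
  induction E using List.reverseRecOn with
  | nil => exact partn_init n
  | append_singleton F p ih =>
    have hGF : Good n F := fun q hq => hG q (List.mem_append_left _ hq)
    have hp := hG p (by simp)
    have : compOf n (F ++ [p]) = cstep (compOf n F) p := by
      simp [compOf, List.foldl_append]
    rw [this]
    exact partn_cstep (ih hGF) hp.1 hp.2.1

lemma kap_cstep_conn {n : Int} {comp : List Int} {E : List (Int × Int)} {p : Int × Int}
    (h : Partn n comp E) (hp : InR n p.1) (hq : InR n p.2) (hc : Conn E p.1 p.2) :
    cstep comp p = comp := by
  rw [cstep, if_pos ((h.2 p.1 p.2 hp hq).mpr hc)]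

lemma kap_cstep_merge {n : Int} {comp : List Int} {E : List (Int × Int)} {p : Int × Int}
    (h : Partn n comp E) (hp : InR n p.1) (hq : InR n p.2) (hc : ¬ Conn E p.1 p.2) :
    kap (cstep comp p) + 1 = kap comp := by
  obtain ⟨hlen, hiff⟩ := h
  have hce : comp.getD p.1.toNat 0 ≠ comp.getD p.2.toNat 0 :=
    fun he => hc ((hiff p.1 p.2 hp hq).mp he)
  rw [cstep, if_neg hce]
  have hmem : ∀ z : Int, InR n z → comp.getD z.toNat 0 ∈ comp := by
    intro z hz
    obtain ⟨hz0, hz1⟩ := hz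
    have hlt : z.toNat < comp.length := by rw [hlen]; omega
    rw [List.getD_eq_getElem _ 0 hlt]
    exact comp.getElem_mem hlt
  have hla : comp.getD p.1.toNat 0 ∈ comp := hmem p.1 hp
  have hlb : comp.getD p.2.toNat 0 ∈ comp := hmem p.2 hq
  have himg : (pvRelabel comp (comp.getD p.2.toNat 0) (comp.getD p.1.toNat 0)).toFinset =
      comp.toFinset.erase (comp.getD p.2.toNat 0) := by
    ext c
    simp only [pvRelabel, List.mem_toFinset, List.mem_map, Finset.mem_erase]
    constructor
    · rintro ⟨d, hd, hdc⟩
      split_ifs at hdc with hdb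
      · exact hdc ▸ ⟨hce, hla⟩
      · exact hdc ▸ ⟨hdc ▸ hdb, hd⟩
    · rintro ⟨hcb, hcm⟩
      exact ⟨c, hcm, by rw [if_neg hcb]⟩
  rw [kap, kap, himg, Finset.card_erase_of_mem (List.mem_toFinset.mpr hlb)]
  have hpos : 0 < comp.toFinset.card :=
    Finset.card_pos.mpr ⟨_, List.mem_toFinset.mpr hlb⟩
  omega

lemma kap_compOf_noBad {n : Int} {E : List (Int × Int)} (hG : Good n E) (hNB : NoBad E) :
    kap (compOf n E) + E.length = n.toNat := by
  induction E using List.reverseRecOn with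
  | nil =>
    simp only [compOf, List.foldl_nil, List.length_nil, Nat.add_zero, kap]
    rw [List.toFinset_card_of_nodup (PySem.List.nodup_pyRange_one 0 n),
      PySem.List.length_pyRange_one]
    simp
  | append_singleton F p ih =>
    rw [noBad_snoc] at hNB
    have hGF : Good n F := fun q hq => hG q (List.mem_append_left _ hq)
    have hp := hG p (by simp)
    have hstep : compOf n (F ++ [p]) = cstep (compOf n F) p := by
      simp [compOf, List.foldl_append]
    rw [hstep]
    have hm := kap_cstep_merge (partn_compOf hGF) hp.1 hp.2.1 hNB.2
    have hih := ih hGF hNB.1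
    simp only [List.length_append, List.length_singleton]
    omega

lemma kap_compOf_ge {n : Int} {E : List (Int × Int)} (hG : Good n E) :
    n.toNat ≤ kap (compOf n E) + E.length := by
  induction E using List.reverseRecOn with
  | nil =>
    simp only [compOf, List.foldl_nil, List.length_nil, Nat.add_zero, kap]
    rw [List.toFinset_card_of_nodup (PySem.List.nodup_pyRange_one 0 n),
      PySem.List.length_pyRange_one]
    simp
  | append_singleton F p ih =>
    have hGF : Good n F := fun q hq => hG q (List.mem_append_left _ hq)
    have hp := hG p (by simp)
    have hstep : compOf n (F ++ [p]) = cstep (compOf n F) p := by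
      simp [compOf, List.foldl_append]
    rw [hstep]
    have hih := ih hGF
    simp only [List.length_append, List.length_singleton]
    by_cases hc : Conn F p.1 p.2
    · rw [kap_cstep_conn (partn_compOf hGF) hp.1 hp.2.1 hc]; omega
    · have hm := kap_cstep_merge (partn_compOf hGF) hp.1 hp.2.1 hc; omega

lemma kap_compOf_bad {n : Int} {E : List (Int × Int)} (hG : Good n E) (hNB : ¬ NoBad E) :
    n.toNat + 1 ≤ kap (compOf n E) + E.length := by
  induction E using List.reverseRecOn with
  | nil => exact absurd (fun i hi => by simp at hi) hNB
  | append_singleton F p ih =>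
    have hGF : Good n F := fun q hq => hG q (List.mem_append_left _ hq)
    have hp := hG p (by simp)
    have hstep : compOf n (F ++ [p]) = cstep (compOf n F) p := by
      simp [compOf, List.foldl_append]
    rw [hstep]
    simp only [List.length_append, List.length_singleton]
    by_cases hNBF : NoBad F
    · have hc : Conn F p.1 p.2 := by
        by_contra hnc
        exact hNB (noBad_snoc.mpr ⟨hNBF, hnc⟩)
      rw [kap_cstep_conn (partn_compOf hGF) hp.1 hp.2.1 hc]
      have := kap_compOf_noBad hGF hNBF
      omega
    · have hih := ih hGF hNBF
      by_cases hc : Conn F p.1 p.2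
      · rw [kap_cstep_conn (partn_compOf hGF) hp.1 hp.2.1 hc]; omega
      · have hm := kap_cstep_merge (partn_compOf hGF) hp.1 hp.2.1 hc; omega

-- the number of distinct values of a list equals the number of first-occurrence positions
lemma kap_eq_firstocc (comp : List Int) :
    kap comp = ((Finset.range comp.length).filter
      (fun k => ∀ j, j < k → comp.getD j 0 ≠ comp.getD k 0)).card := by
  induction comp using List.reverseRecOn with
  | nil => simp [kap]
  | append_singleton comp c ih =>
    have hgl : ∀ j, j < comp.length → (comp ++ [c]).getD j 0 = comp.getD j 0 := by
      intro j hj; simp only [List.getD, List.getElem?_append_left hj]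
    have hgr : (comp ++ [c]).getD comp.length 0 = c := by
      simp only [List.getD, List.getElem?_append_right (le_refl _)]; simp
    have hlen : (comp ++ [c]).length = comp.length + 1 := by simp
    rw [hlen, Finset.range_add_one, Finset.filter_insert]
    have hfc : (Finset.range comp.length).filter
        (fun k => ∀ j, j < k → (comp ++ [c]).getD j 0 ≠ (comp ++ [c]).getD k 0) =
        (Finset.range comp.length).filter
        (fun k => ∀ j, j < k → comp.getD j 0 ≠ comp.getD k 0) := by
      apply Finset.filter_congr
      intro k hk
      rw [Finset.mem_range] at hk
      try simp only [eq_iff_iff]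
      constructor
      · intro hcond j hj; rw [← hgl j (by omega), ← hgl k hk]; exact hcond j hj
      · intro hcond j hj; rw [hgl j (by omega), hgl k hk]; exact hcond j hj
    have hmemiff : (∀ j, j < comp.length →
        (comp ++ [c]).getD j 0 ≠ (comp ++ [c]).getD comp.length 0) ↔ c ∉ comp := by
      simp only [hgr]
      constructor
      · intro hcond hcm
        obtain ⟨j, hj, hje⟩ := List.mem_iff_getElem.mp hcm
        exact hcond j hj (by rw [hgl j hj, List.getD_eq_getElem _ 0 hj]; exact hje)
      · intro hcm j hj he
        apply hcm
        rw [hgl j hj, List.getD_eq_getElem _ 0 hj] at he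
        exact he ▸ List.getElem_mem hj
    have htf : (comp ++ [c]).toFinset = insert c comp.toFinset := by
      simp [List.toFinset_append, Finset.union_comm]
    by_cases hc : c ∈ comp
    · rw [if_neg (fun hcond => (hmemiff.mp hcond) hc), hfc, ← ih, kap, htf,
        Finset.insert_eq_self.mpr (List.mem_toFinset.mpr hc)]
      rfl
    · rw [if_pos (hmemiff.mpr hc), hfc,
        Finset.card_insert_of_notMem (fun hmem => by
          have := Finset.mem_of_mem_filter _ hmem
          simp at this), ← ih, kap, htf,
        Finset.card_insert_of_notMem (fun hmem => hc (List.mem_toFinset.mp hmem))]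
      rfl

-- two labellings of the same length inducing the same partition have the same number of labels
lemma kap_eq_of_same_partition {comp comp' : List Int} (hlen : comp.length = comp'.length)
    (h : ∀ j k, j < comp.length → k < comp.length →
      (comp.getD j 0 = comp.getD k 0 ↔ comp'.getD j 0 = comp'.getD k 0)) :
    kap comp = kap comp' := by
  rw [kap_eq_firstocc, kap_eq_firstocc, ← hlen]
  congr 1
  apply Finset.filter_congr
  intro k hk
  rw [Finset.mem_range] at hk
  try simp only [eq_iff_iff]
  constructor <;> intro hcond j hj he
  · exact hcond j hj ((h j k (by omega) (by omega)).mpr he)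
  · exact hcond j hj ((h j k (by omega) (by omega)).mp he)

lemma allConn_iff_kap_le_one {n : Int} {E : List (Int × Int)} (hn : 1 ≤ n) (hG : Good n E) :
    AllConn n E ↔ kap (compOf n E) ≤ 1 := by
  obtain ⟨hlen, hiff⟩ := partn_compOf hG
  have h0 : InR n 0 := ⟨le_refl 0, by omega⟩
  have hlab : ∀ k, k < n.toNat →
      ((compOf n E).getD k 0 = (compOf n E).getD 0 0 ↔ Conn E (k : Int) 0) := by
    intro k hk
    have hx : InR n (k : Int) := ⟨Int.natCast_nonneg k, by omega⟩
    have := hiff (k : Int) 0 hx h0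
    simp only [Int.toNat_natCast, Int.toNat_zero] at this ⊢
    exact this
  constructor
  · intro hall
    rw [kap, Finset.card_le_one]
    intro a ha b hb
    rw [List.mem_toFinset] at ha hb
    obtain ⟨ka, hka, hkae⟩ := List.mem_iff_getElem.mp ha
    obtain ⟨kb, hkb, hkbe⟩ := List.mem_iff_getElem.mp hb
    rw [hlen] at hka hkb
    have h1 : (compOf n E).getD ka 0 = a := by
      rw [List.getD_eq_getElem _ 0 (by rw [hlen]; omega)]; exact hkae
    have h2 : (compOf n E).getD kb 0 = b := by
      rw [List.getD_eq_getElem _ 0 (by rw [hlen]; omega)]; exact hkbe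
    have c1 : Conn E (ka : Int) 0 :=
      (hall (ka : Int) ⟨Int.natCast_nonneg ka, by omega⟩).symm
    have c2 : Conn E (kb : Int) 0 :=
      (hall (kb : Int) ⟨Int.natCast_nonneg kb, by omega⟩).symm
    rw [← h1, ← h2, (hlab ka hka).mpr c1, (hlab kb hkb).mpr c2]
  · intro hk x hx
    obtain ⟨hx0, hx1⟩ := id hx
    have hxa : (compOf n E).getD x.toNat 0 ∈ (compOf n E).toFinset := by
      rw [List.mem_toFinset, List.getD_eq_getElem _ 0 (by rw [hlen]; omega)]
      exact (compOf n E).getElem_mem _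
    have h0a : (compOf n E).getD 0 0 ∈ (compOf n E).toFinset := by
      rw [List.mem_toFinset, List.getD_eq_getElem _ 0 (by rw [hlen]; omega)]
      exact (compOf n E).getElem_mem _
    have heq := Finset.card_le_one.mp hk _ hxa _ h0a
    exact ((hiff x 0 hx h0).mp heq).symm

-- NoBad together with a cycle instance is contradictory (counting argument)
lemma noBad_not_badErase {n : Int} {E : List (Int × Int)} (hG : Good n E) (hNB : NoBad E)
    (hBE : BadErase E) : False := by
  obtain ⟨i, hi, hconn⟩ := hBE
  have hGe : Good n (E.eraseIdx i) := fun p hp => hG p (List.mem_of_mem_eraseIdx hp)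
  have hlenE : (E.eraseIdx i).length = E.length - 1 := by
    rw [List.length_eraseIdx]; simp [hi]
  have h1 := kap_compOf_noBad hG hNB
  have h2 := kap_compOf_ge hGe
  obtain ⟨hlen1, hiffE⟩ := partn_compOf hG
  obtain ⟨hlen2, hiffe⟩ := partn_compOf hGe
  have hcc := conn_eraseIdx_iff hi hconn
  have hkeq : kap (compOf n E) = kap (compOf n (E.eraseIdx i)) := by
    apply kap_eq_of_same_partition (by rw [hlen1, hlen2])
    intro j k hj hk
    rw [hlen1] at hj hk
    have hxj : InR n (j : Int) := ⟨Int.natCast_nonneg j, by omega⟩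
    have hxk : InR n (k : Int) := ⟨Int.natCast_nonneg k, by omega⟩
    have e1 := hiffE (j : Int) (k : Int) hxj hxk
    have e2 := hiffe (j : Int) (k : Int) hxj hxk
    simp only [Int.toNat_natCast] at e1 e2
    rw [e1, e2, hcc]
  rw [hlenE] at h2
  omega

-- ---- characterisation of B ----

lemma pvGetNonneg {α : Type} (l : List α) (d : α) (x : Int) (h0 : 0 ≤ x)
    (hlt : x.toNat < l.length) : PySem.List.pyGet? l x = some (l.getD x.toNat d) := by
  have h1 : PySem.List.pyGet? l x = l[x.toNat]? := by
    conv_lhs => rw [← Int.toNat_of_nonneg h0]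
    exact PySem.List.pyGet?_natCast l x.toNat
  rw [List.getD_eq_getElem l d hlt, h1, List.getElem?_eq_getElem hlt]

lemma noBad_elt {D t : List (Int × Int)} {p : Int × Int} (h : NoBad (D ++ p :: t)) :
    ¬ Conn D p.1 p.2 := by
  intro hc
  have h1 : (D ++ p :: t).take D.length = D := by
    rw [List.take_append_of_le_length (le_refl _), List.take_length]
  have h2 : (D ++ p :: t).getD D.length (0,0) = p := by
    simp only [List.getD, List.getElem?_append_right (le_refl _)]
    simp
  exact h D.length (by simp) (by rw [h1, h2]; exact hc)

lemma pvUF_false_of_selfloop {E : List (Int × Int)} (h : ∃ s, (s, s) ∈ E) :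
    ∀ comp c, pvUF E comp c = false := by
  induction E with
  | nil => obtain ⟨s0, hs0⟩ := h; simp at hs0
  | cons p rest ih =>
    obtain ⟨s0, hs0⟩ := h
    intro comp c
    obtain ⟨a, b⟩ := p
    by_cases hab : a = b
    · simp [pvUF, hab]
    · have hmem : (s0, s0) ∈ rest := by
        rcases List.mem_cons.mp hs0 with h1 | h1
        · exfalso; apply hab; cases h1; rfl
        · exact h1
      simp only [pvUF, if_neg hab]
      rcases PySem.List.pyGet? comp a with _ | cs <;>
        rcases PySem.List.pyGet? comp b with _ | ce <;>
        simp [ih ⟨s0, hmem⟩]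

lemma pvUF_spec {n : Int} (hn : 0 ≤ n) (E : List (Int × Int)) (D : List (Int × Int))
    (hG : Good n (D ++ E)) (hNB : NoBad D) :
    pvUF E (compOf n D) (n - D.length) = true ↔
      (NoBad (D ++ E) ∧ n ≤ D.length + E.length + 1) := by
  induction E generalizing D with
  | nil =>
    simp only [pvUF, List.append_nil, List.length_nil]
    constructor
    · intro h
      refine ⟨hNB, ?_⟩
      have := of_decide_eq_true h
      omega
    · rintro ⟨-, h⟩
      apply decide_eq_true
      omega
  | cons p t ih =>
    obtain ⟨a, b⟩ := p
    have hGD : Good n D := fun q hq => hG q (List.mem_append_left _ hq)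
    have hpG := hG (a, b) (by simp)
    have hab : a ≠ b := hpG.2.2
    obtain ⟨ha0, ha1⟩ := hpG.1
    obtain ⟨hb0, hb1⟩ := hpG.2.1
    obtain ⟨hlen, hiff⟩ := partn_compOf hGD
    have hga := pvGetNonneg (compOf n D) 0 a ha0 (by rw [hlen]; omega)
    have hgb := pvGetNonneg (compOf n D) 0 b hb0 (by rw [hlen]; omega)
    have hassoc : (D ++ [(a, b)]) ++ t = D ++ (a, b) :: t := by simp
    by_cases hcs : (compOf n D).getD a.toNat 0 = (compOf n D).getD b.toNat 0
    · have hconn : Conn D a b := (hiff a b ⟨ha0, ha1⟩ ⟨hb0, hb1⟩).mp hcs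
      simp only [pvUF, if_neg hab, hga, hgb, if_pos hcs]
      constructor
      · intro h; cases h
      · rintro ⟨hNB', -⟩
        exact absurd hconn (noBad_elt hNB')
    · have hnconn : ¬ Conn D a b := fun hc => hcs ((hiff a b ⟨ha0, ha1⟩ ⟨hb0, hb1⟩).mpr hc)
      have hrel : pvRelabel (compOf n D) ((compOf n D).getD b.toNat 0)
          ((compOf n D).getD a.toNat 0) = compOf n (D ++ [(a, b)]) := by
        rw [show compOf n (D ++ [(a, b)]) = cstep (compOf n D) (a, b) by
          simp [compOf, List.foldl_append]]
        rw [cstep, if_neg hcs]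
      have hih := ih (D ++ [(a, b)])
        (by rw [hassoc]; exact hG)
        (noBad_snoc.mpr ⟨hNB, hnconn⟩)
      rw [hassoc] at hih
      simp only [pvUF, if_neg hab, hga, hgb, if_neg hcs, hrel]
      have hlen2 : ((D ++ [(a, b)]).length : Int) = (D.length : Int) + 1 := by simp
      rw [show n - (D.length : Int) - 1 = n - ((D ++ [(a, b)]).length : Int) by
        rw [hlen2]; ring] at *
      rw [hih]
      constructor
      · rintro ⟨h1, h2⟩; exact ⟨h1, by simp at h2 ⊢; omega⟩
      · rintro ⟨h1, h2⟩; exact ⟨h1, by simp at h2 ⊢; omega⟩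

lemma alt_spec {n : Int} (hn : 0 ≤ n) {es ee : List Int} (hG : Good n (es.zip ee)) :
    is_it_a_tree_alt n es ee = true ↔
      (NoBad (es.zip ee) ∧ n ≤ (es.zip ee).length + 1) := by
  have h := pvUF_spec hn (es.zip ee) [] (by simpa using hG) (fun i hi => by simp at hi)
  have hc : compOf n ([] : List (Int × Int)) = PySem.List.pyRange 0 n 1 := rfl
  rw [hc] at h
  simp only [List.nil_append, List.length_nil, Nat.cast_zero, sub_zero] at h
  rw [is_it_a_tree_alt, h]
  constructor
  · rintro ⟨h1, h2⟩; exact ⟨h1, by omega⟩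
  · rintro ⟨h1, h2⟩; exact ⟨h1, by omega⟩

-- ---- characterisation of A: adjacency build ----

def adjOf (E : List (Int × Int)) (adj : List (List Int)) : List (List Int) :=
  E.foldl (fun a p => pvAdjAdd (pvAdjAdd a p.1 p.2) p.2 p.1) adj

def Adjy (n : Int) (E : List (Int × Int)) (adj : List (List Int)) : Prop :=
  adj.length = n.toNat ∧
  ∀ v, InR n v → ∀ w, (adj.getD v.toNat []).count w = cnt E v w

lemma pvGetDSetSelf {α : Type} {l : List α} {i : Nat} {x : α} (d : α) (h : i < l.length) :
    (l.set i x).getD i d = x := by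
  rw [List.getD_eq_getElem _ d (by simpa using h)]
  exact List.getElem_set_self _

lemma pvGetDSetNe {α : Type} {l : List α} {i k : Nat} {x : α} (d : α) (h : i ≠ k) :
    (l.set i x).getD k d = l.getD k d := by
  rcases Nat.lt_or_ge k l.length with hk | hk
  · rw [List.getD_eq_getElem _ d (by simpa using hk), List.getD_eq_getElem _ d hk]
    exact List.getElem_set_ne h _
  · rw [List.getD_eq_default _ _ (by simpa using hk), List.getD_eq_default _ _ hk]

lemma pvAdjAdd_eq {adj : List (List Int)} {i : Int} (v : Int) (h0 : 0 ≤ i)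
    (hlt : i.toNat < adj.length) :
    pvAdjAdd adj i v = adj.set i.toNat (adj.getD i.toNat [] ++ [v]) := by
  simp only [pvAdjAdd, pvGetNonneg adj [] i h0 hlt]
  exact PySem.List.pySetD_of_nonneg adj _ h0

lemma adjy_step {n : Int} {E : List (Int × Int)} {adj : List (List Int)} (hA : Adjy n E adj)
    {a b : Int} (hga : InR n a) (hgb : InR n b) (hab : a ≠ b) :
    Adjy n (E ++ [(a, b)]) (pvAdjAdd (pvAdjAdd adj a b) b a) := by
  obtain ⟨hlen, hcount⟩ := hA
  obtain ⟨ha0, ha1⟩ := hga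
  obtain ⟨hb0, hb1⟩ := hgb
  have hne : a.toNat ≠ b.toNat := fun he => hab (by omega)
  have hlta : a.toNat < adj.length := by rw [hlen]; omega
  have e1 := pvAdjAdd_eq (adj := adj) b ha0 hlta
  set adj1 := adj.set a.toNat (adj.getD a.toNat [] ++ [b]) with hadj1
  have hlen1 : adj1.length = n.toNat := by rw [hadj1, List.length_set, hlen]
  have hltb : b.toNat < adj1.length := by rw [hlen1]; omega
  have e2 := pvAdjAdd_eq (adj := adj1) a hb0 hltb
  rw [e1, e2]
  set adj2 := adj1.set b.toNat (adj1.getD b.toNat [] ++ [a]) with hadj2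
  have hg1b : adj1.getD b.toNat [] = adj.getD b.toNat [] := pvGetDSetNe [] hne
  have hg1a : adj1.getD a.toNat [] = adj.getD a.toNat [] ++ [b] := pvGetDSetSelf [] hlta
  refine ⟨by rw [hadj2, List.length_set, hlen1], ?_⟩
  intro v hv w
  obtain ⟨hv0, hv1⟩ := hv
  have hcnt : cnt (E ++ [(a, b)]) v w =
      cnt E v w + ((if a = v ∧ b = w then 1 else 0) + (if a = w ∧ b = v then 1 else 0)) := by
    by_cases h1 : a = v ∧ b = w <;> by_cases h2 : a = w ∧ b = v <;>
      simp [cnt, List.count_append, List.count_cons, List.count_nil, Prod.ext_iff, h1, h2] <;>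
      omega
  by_cases hveqb : v.toNat = b.toNat
  · have hvb : v = b := by omega
    have hgv : adj2.getD v.toNat [] = adj.getD b.toNat [] ++ [a] := by
      rw [hveqb, hadj2, pvGetDSetSelf [] hltb, hg1b]
    rw [hgv, List.count_append, hcnt, hvb, hcount b ⟨hb0, hb1⟩ w]
    rw [if_neg (show ¬(a = b ∧ b = w) from fun hc => hab hc.1)]
    by_cases haw : a = w
    · subst haw
      rw [if_pos (show a = a ∧ b = b from ⟨rfl, rfl⟩)]
      have h1 : List.count a [a] = 1 := by simp
      rw [h1]
    · rw [if_neg (show ¬(a = w ∧ b = b) from fun hc => haw hc.1)]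
      have h1 : List.count w [a] = 0 := List.count_eq_zero.mpr (by
        simp only [List.mem_singleton]; exact fun h => haw h.symm)
      rw [h1]
  · by_cases hveqa : v.toNat = a.toNat
    · have hva : v = a := by omega
      have hgv : adj2.getD v.toNat [] = adj.getD a.toNat [] ++ [b] := by
        rw [hveqa, hadj2, pvGetDSetNe [] (fun he => hne he.symm), hg1a]
      rw [hgv, List.count_append, hcnt, hva, hcount a ⟨ha0, ha1⟩ w]
      rw [if_neg (show ¬(a = w ∧ b = a) from fun hc => hab hc.2.symm)]
      by_cases hbw : b = w
      · subst hbw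
        rw [if_pos (show a = a ∧ b = b from ⟨rfl, rfl⟩)]
        have h1 : List.count b [b] = 1 := by simp
        rw [h1]
      · rw [if_neg (show ¬(a = a ∧ b = w) from fun hc => hbw hc.2)]
        have h1 : List.count w [b] = 0 := List.count_eq_zero.mpr (by
          simp only [List.mem_singleton]; exact fun h => hbw h.symm)
        rw [h1]
    · have hgv : adj2.getD v.toNat [] = adj.getD v.toNat [] := by
        rw [hadj2, pvGetDSetNe [] (fun he => hveqb he.symm),
          pvGetDSetNe [] (fun he => hveqa he.symm)]
      have hn1 : ¬ (a = v ∧ b = w) := fun hc => hveqa (by rw [← hc.1])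
      have hn2 : ¬ (a = w ∧ b = v) := fun hc => hveqb (by rw [← hc.2])
      rw [hgv, hcnt, hcount v ⟨hv0, hv1⟩ w, if_neg hn1, if_neg hn2]
      omega

lemma adjy_adjOf {n : Int} {E : List (Int × Int)} (hG : Good n E) :
    Adjy n E (adjOf E (List.replicate n.toNat [])) := by
  induction E using List.reverseRecOn with
  | nil =>
    refine ⟨by simp [adjOf], fun v hv w => ?_⟩
    obtain ⟨hv0, hv1⟩ := hv
    have hre : adjOf [] (List.replicate n.toNat ([] : List Int)) =
        List.replicate n.toNat [] := rfl
    rw [hre, List.getD_eq_getElem _ _ (by simp; omega)]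
    simp [cnt]
  | append_singleton F p ih =>
    have hGF : Good n F := fun q hq => hG q (List.mem_append_left _ hq)
    have hp := hG p (by simp)
    have hstep : adjOf (F ++ [p]) (List.replicate n.toNat []) =
        pvAdjAdd (pvAdjAdd (adjOf F (List.replicate n.toNat [])) p.1 p.2) p.2 p.1 := by
      simp [adjOf, List.foldl_append]
    rw [hstep]
    exact adjy_step (ih hGF) hp.1 hp.2.1 hp.2.2

lemma pvBuild_eq_some (es ee : List Int)
    (hnl : ∀ p ∈ es.zip ee, p.1 ≠ p.2) (hle : es.length ≤ ee.length) :
    ∀ adj, pvBuild es ee adj = some (adjOf (es.zip ee) adj) := by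
  induction es generalizing ee with
  | nil => intro adj; simp [pvBuild, adjOf]
  | cons s es' ih =>
    intro adj
    cases ee with
    | nil => simp at hle
    | cons e ee' =>
      have hzip : (s :: es').zip (e :: ee') = (s, e) :: es'.zip ee' := List.zip_cons_cons
      have hse : s ≠ e := hnl (s, e) (by rw [hzip]; exact List.mem_cons_self)
      rw [hzip, pvBuild, if_neg hse]
      rw [ih ee' (fun p hp => hnl p (by rw [hzip]; exact List.mem_cons_of_mem _ hp))
        (by simpa using hle)]
      simp [adjOf]

lemma pvBuild_eq_none (es ee : List Int)
    (k : Nat) (hk : k < es.length) (hke : k < ee.length)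
    (hsl : es.getD k 0 = ee.getD k 0)
    (hfirst : ∀ j, j < k → ¬ (j < ee.length ∧ es.getD j 0 = ee.getD j 0)) :
    ∀ adj, pvBuild es ee adj = none := by
  induction k generalizing es ee with
  | zero =>
    intro adj
    cases es with
    | nil => simp at hk
    | cons s es' =>
      cases ee with
      | nil => rfl
      | cons e ee' =>
        have : s = e := by simpa using hsl
        rw [pvBuild, if_pos this]
  | succ k ih =>
    intro adj
    cases es with
    | nil => simp at hk
    | cons s es' =>
      cases ee with
      | nil => rfl
      | cons e ee' =>
        have hne : s ≠ e := by
          intro he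
          exact hfirst 0 (by omega) ⟨by simp, by simpa using he⟩
        rw [pvBuild, if_neg hne]
        exact ih es' ee' (by simpa using hk) (by simpa using hke)
          (by simpa using hsl)
          (fun j hj hcon => hfirst (j + 1) (by omega)
            ⟨by simp; omega, by simpa using hcon.2⟩) _

-- ---- characterisation of A: BFS ----

-- the invariant of bfs's while-loop: done = popped vertices, q = the queue,
-- done ++ q = all marked vertices in discovery order
structure BfsInv (n : Int) (E : List (Int × Int)) (vis par : List Int) (done q : List Int) : Prop where
  hvlen : vis.length = n.toNat
  hplen : par.length = n.toNat
  hbits : ∀ k, k < n.toNat → vis.getD k 0 = 0 ∨ vis.getD k 0 = 1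
  hnodup : (done ++ q).Nodup
  hInR : ∀ x ∈ done ++ q, InR n x
  hmark : ∀ x, InR n x → (vis.getD x.toNat 0 = 1 ↔ x ∈ done ++ q)
  hhead : ∃ t, done ++ q = 0 :: t
  hp0 : par.getD 0 0 = 0
  hpar : ∀ x ∈ done ++ q, x ≠ 0 →
    InR n (par.getD x.toNat 0) ∧ par.getD x.toNat 0 ∈ done ∧
    1 ≤ cnt E x (par.getD x.toNat 0) ∧
    (done ++ q).idxOf (par.getD x.toNat 0) < (done ++ q).idxOf x ∧
    par.getD x.toNat 0 ≠ x
  hproc : ∀ u ∈ done, ∀ w, 1 ≤ cnt E u w →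
    w ∈ done ++ q ∧ (w = par.getD u.toNat 0 ∨
      (par.getD w.toNat 0 = u ∧ w ≠ 0 ∧ cnt E u w = 1))

-- the invariant in the middle of processing adj_list[v]: dn = entries already processed,
-- newly = vertices discovered during this pop
structure BfsMid (n : Int) (E : List (Int × Int)) (v : Int)
    (done0 qt dn newly vis par : List Int) : Prop where
  hvlen : vis.length = n.toNat
  hplen : par.length = n.toNat
  hbits : ∀ k, k < n.toNat → vis.getD k 0 = 0 ∨ vis.getD k 0 = 1
  hnodup : (done0 ++ v :: (qt ++ newly)).Nodup
  hInR : ∀ x ∈ done0 ++ v :: (qt ++ newly), InR n x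
  hmark : ∀ x, InR n x → (vis.getD x.toNat 0 = 1 ↔ x ∈ done0 ++ v :: (qt ++ newly))
  hhead : ∃ t, done0 ++ v :: (qt ++ newly) = 0 :: t
  hp0 : par.getD 0 0 = 0
  hpar : ∀ x ∈ done0 ++ v :: (qt ++ newly), x ≠ 0 →
    InR n (par.getD x.toNat 0) ∧ 1 ≤ cnt E x (par.getD x.toNat 0) ∧
    (done0 ++ v :: (qt ++ newly)).idxOf (par.getD x.toNat 0) <
      (done0 ++ v :: (qt ++ newly)).idxOf x ∧ par.getD x.toNat 0 ≠ x
  hparold : ∀ x ∈ done0 ++ v :: qt, x ≠ 0 → par.getD x.toNat 0 ∈ done0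
  hparnew : ∀ u ∈ newly, par.getD u.toNat 0 = v ∧ dn.count u = 1
  hproc : ∀ u ∈ done0, ∀ w, 1 ≤ cnt E u w →
    w ∈ done0 ++ v :: qt ∧ (w = par.getD u.toNat 0 ∨
      (par.getD w.toNat 0 = u ∧ w ≠ 0 ∧ cnt E u w = 1))
  hdn : ∀ w, 1 ≤ dn.count w → (w = par.getD v.toNat 0 ∨ w ∈ newly)

lemma pvNodupNotBoth {α : Type} {l₁ l₂ : List α} (h : (l₁ ++ l₂).Nodup) {x : α}
    (h1 : x ∈ l₁) (h2 : x ∈ l₂) : False := by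
  rw [List.nodup_append] at h
  exact h.2.2 x h1 x h2 rfl

-- the tree edges recorded in `par`, one per non-root discovered vertex
def parPairs (par : List Int) (ord : List Int) : List (Int × Int) :=
  (ord.filter (fun x => decide (x ≠ 0))).map (fun x => (x, par.getD x.toNat 0))

lemma badErase_mk {E : List (Int × Int)} {i : Nat} (hi : i < E.length)
    (hc : Conn (E.eraseIdx i) (E[i].1) (E[i].2)) : BadErase E :=
  ⟨i, hi, by rwa [List.getD_eq_getElem E (0,0) hi]⟩

lemma conn_parPairs (ord par : List Int) (hhead : ∃ t, ord = 0 :: t)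
    (hpar : ∀ x ∈ ord, x ≠ 0 →
      ord.idxOf (par.getD x.toNat 0) < ord.idxOf x ∧ par.getD x.toNat 0 ∈ ord) :
    ∀ x ∈ ord, Conn (parPairs par ord) 0 x := by
  have main : ∀ k x, x ∈ ord → ord.idxOf x = k → Conn (parPairs par ord) 0 x := by
    intro k
    induction k using Nat.strong_induction_on with
    | _ k ih =>
      intro x hx hk
      by_cases hx0 : x = 0
      · subst hx0; exact Conn.refl 0
      · obtain ⟨hlt, hmem⟩ := hpar x hx hx0
        have hcpx := ih _ (hk ▸ hlt) _ hmem rfl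
        have hpair : (x, par.getD x.toNat 0) ∈ parPairs par ord := by
          rw [parPairs]
          exact List.mem_map.mpr ⟨x, List.mem_filter.mpr ⟨hx, by simpa using hx0⟩, rfl⟩
        exact hcpx.trans (Conn.symm (Conn.base hpair))
  exact fun x hx => main (ord.idxOf x) x hx rfl

lemma badErase_of_two {E : List (Int × Int)} {v w : Int} (hvw : v ≠ w) (h2 : 2 ≤ cnt E v w) :
    BadErase E := by
  have herase : ∀ (p : Int × Int) (i : Nat) (hi : i < E.length),
      (E.eraseIdx i).count p + (if E[i] = p then 1 else 0) = E.count p := by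
    intro p i hi
    have hperm : (E[i] :: E.eraseIdx i).Perm E := List.getElem_cons_eraseIdx_perm hi
    rw [← hperm.count_eq, List.count_cons]
    simp only [beq_iff_eq]
  have hne : (v, w) ≠ (w, v) := fun hc => hvw (by cases hc; rfl)
  rw [cnt] at h2
  by_cases hB : 2 ≤ E.count (v, w)
  · obtain ⟨i, hi, hie⟩ := List.mem_iff_getElem.mp
      (List.count_pos_iff.mp (show 0 < E.count (v, w) by omega))
    refine badErase_mk hi ?_
    have h3 := herase (v, w) i hi
    rw [hie, if_pos rfl] at h3
    rw [hie]
    exact Conn.base (List.count_pos_iff.mp (show 0 < (E.eraseIdx i).count (v, w) by omega))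
  · by_cases hA : 1 ≤ E.count (v, w)
    · have hwv : 1 ≤ E.count (w, v) := by omega
      obtain ⟨i, hi, hie⟩ := List.mem_iff_getElem.mp
        (List.count_pos_iff.mp (show 0 < E.count (v, w) by omega))
      refine badErase_mk hi ?_
      have h3 := herase (w, v) i hi
      rw [hie, if_neg hne] at h3
      rw [hie]
      exact Conn.symm (Conn.base
        (List.count_pos_iff.mp (show 0 < (E.eraseIdx i).count (w, v) by omega)))
    · have hwv : 2 ≤ E.count (w, v) := by omega
      obtain ⟨i, hi, hie⟩ := List.mem_iff_getElem.mp
        (List.count_pos_iff.mp (show 0 < E.count (w, v) by omega))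
      refine badErase_mk hi ?_
      have h3 := herase (w, v) i hi
      rw [hie, if_pos rfl] at h3
      rw [hie]
      exact Conn.base (List.count_pos_iff.mp (show 0 < (E.eraseIdx i).count (w, v) by omega))

lemma badErase_of_fire {n : Int} {E : List (Int × Int)} (ord par : List Int)
    (hhead : ∃ t, ord = 0 :: t)
    (hpar : ∀ x ∈ ord, x ≠ 0 →
      ord.idxOf (par.getD x.toNat 0) < ord.idxOf x ∧ par.getD x.toNat 0 ∈ ord)
    (hparcnt : ∀ x ∈ ord, x ≠ 0 → 1 ≤ cnt E x (par.getD x.toNat 0))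
    {v w : Int} (hv : v ∈ ord) (hw : w ∈ ord) (hcnt : 1 ≤ cnt E v w)
    (hnp : w ≠ par.getD v.toNat 0) (hnpw : par.getD w.toNat 0 ≠ v) : BadErase E := by
  have hPL := conn_parPairs ord par hhead hpar
  have hvw2 : Conn (parPairs par ord) v w := (hPL v hv).symm.trans (hPL w hw)
  have hone : (v, w) ∈ E ∨ (w, v) ∈ E := by
    rw [cnt] at hcnt
    by_cases h1 : 1 ≤ E.count (v, w)
    · exact Or.inl (List.count_pos_iff.mp (by omega))
    · exact Or.inr (List.count_pos_iff.mp (show 0 < E.count (w, v) by omega))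
  obtain ⟨i, hi, hie⟩ : ∃ i, ∃ hi : i < E.length, E[i] = (v, w) ∨ E[i] = (w, v) := by
    rcases hone with h | h
    · obtain ⟨i, hi, he⟩ := List.mem_iff_getElem.mp h; exact ⟨i, hi, Or.inl he⟩
    · obtain ⟨i, hi, he⟩ := List.mem_iff_getElem.mp h; exact ⟨i, hi, Or.inr he⟩
  have hmm : ∀ q0 : Int × Int, q0 ∈ E → q0 ≠ E[i] → q0 ∈ E.eraseIdx i := by
    intro q0 hq0 hne0
    have hperm : (E[i] :: E.eraseIdx i).Perm E := List.getElem_cons_eraseIdx_perm hi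
    rcases List.mem_cons.mp (hperm.mem_iff.mpr hq0) with h | h
    · exact absurd h hne0
    · exact h
  have hmap : ∀ p ∈ parPairs par ord, Conn (E.eraseIdx i) p.1 p.2 := by
    intro p hp
    rw [parPairs] at hp
    obtain ⟨x, hxf, rfl⟩ := List.mem_map.mp hp
    obtain ⟨hxo, hx0'⟩ := List.mem_filter.mp hxf
    have hx0 : x ≠ 0 := by simpa using hx0'
    have hcx := hparcnt x hxo hx0
    have hqm : (x, par.getD x.toNat 0) ∈ E ∨ (par.getD x.toNat 0, x) ∈ E := by
      rw [cnt] at hcx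
      by_cases h1 : 1 ≤ E.count (x, par.getD x.toNat 0)
      · exact Or.inl (List.count_pos_iff.mp (by omega))
      · exact Or.inr (List.count_pos_iff.mp
          (show 0 < E.count (par.getD x.toNat 0, x) by omega))
    rcases hqm with hq | hq
    · have hne0 : (x, par.getD x.toNat 0) ≠ E[i] := by
        rcases hie with he | he <;> rw [he] <;> intro hc <;> injection hc with hc1 hc2
        · exact hnp (by rw [← hc2, ← hc1])
        · exact hnpw (by rw [← hc1]; exact hc2)
      exact Conn.base (hmm _ hq hne0)
    · have hne0 : (par.getD x.toNat 0, x) ≠ E[i] := by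
        rcases hie with he | he <;> rw [he] <;> intro hc <;> injection hc with hc1 hc2
        · exact hnpw (by rw [← hc2]; exact hc1)
        · exact hnp (by rw [← hc1, ← hc2])
      exact Conn.symm (Conn.base (hmm _ hq hne0))
  have hconnE : Conn (E.eraseIdx i) v w := conn_map hmap hvw2
  refine badErase_mk hi ?_
  rcases hie with he | he <;> rw [he]
  · exact hconnE
  · exact hconnE.symm

-- one BFS step: processing the rest of adj_list[v]
lemma pvBfsInner_spec {n : Int} {E : List (Int × Int)} (hG : Good n E) {adj : List (List Int)}
    (hA : Adjy n E adj) (v : Int) (done0 qt : List Int) :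
    ∀ rest dn vis par newly,
    adj.getD v.toNat [] = dn ++ rest →
    BfsMid n E v done0 qt dn newly vis par →
    ( (pvBfsInner v rest vis par (qt ++ newly) ≠ .err) ∧
      (pvBfsInner v rest vis par (qt ++ newly) = .fired → BadErase E) ∧
      (∀ vis' par' q', pvBfsInner v rest vis par (qt ++ newly) = .next vis' par' q' →
        ∃ newly2, q' = qt ++ newly2 ∧
          BfsMid n E v done0 qt (dn ++ rest) newly2 vis' par') ) := by
  intro rest
  induction rest with
  | nil =>
    intro dn vis par newly hsplit mid
    refine ⟨by simp [pvBfsInner], fun h => by simp [pvBfsInner] at h, ?_⟩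
    intro vis' par' q' h
    simp only [pvBfsInner, PvStep.next.injEq] at h
    obtain ⟨rfl, rfl, rfl⟩ := h
    exact ⟨newly, rfl, by simpa using mid⟩
  | cons w rest' ih =>
    intro dn vis par newly hsplit mid
    have hordv : v ∈ done0 ++ v :: (qt ++ newly) := by simp
    have hvInR : InR n v := mid.hInR v hordv
    have h0mem : (0 : Int) ∈ done0 ++ v :: (qt ++ newly) := by
      obtain ⟨t, ht⟩ := mid.hhead; rw [ht]; exact List.mem_cons_self
    have hvnn : 0 ≤ v := hvInR.1
    have hnd := mid.hnodup
    have hndB : ((done0 ++ [v]) ++ (qt ++ newly)).Nodup := by simpa using hnd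
    have hndC : ((done0 ++ v :: qt) ++ newly).Nodup := by simpa using hnd
    have hvnotd : v ∉ done0 := fun hc => pvNodupNotBoth hnd hc List.mem_cons_self
    have hparv_mem : v ≠ 0 → par.getD v.toNat 0 ∈ done0 :=
      fun hv0 => mid.hparold v (by simp) hv0
    have hcntw : cnt E v w = (dn ++ w :: rest').count w := by
      rw [← hsplit]; exact (hA.2 v hvInR w).symm
    have hcw1 : 1 ≤ cnt E v w := by
      rw [hcntw, List.count_append, List.count_cons_self]; omega
    have hwE : (v, w) ∈ E ∨ (w, v) ∈ E := by
      rw [cnt] at hcw1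
      by_cases h1 : 1 ≤ E.count (v, w)
      · exact Or.inl (List.count_pos_iff.mp (by omega))
      · exact Or.inr (List.count_pos_iff.mp (show 0 < E.count (w, v) by omega))
    have hwInR : InR n w := by
      rcases hwE with h | h
      · exact (hG _ h).2.1
      · exact (hG _ h).1
    have hvw : v ≠ w := by
      intro he
      have hnm : (v, v) ∉ E := fun hm => (hG _ hm).2.2 rfl
      rw [cnt, he] at hcw1
      rw [← he] at hcw1
      have := List.count_eq_zero.mpr hnm
      omega
    have hgvw : PySem.List.pyGet? vis w = some (vis.getD w.toNat 0) :=
      pvGetNonneg vis 0 w hwInR.1 (by rw [mid.hvlen]; obtain ⟨h1, h2⟩ := hwInR; omega)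
    have hpv : PySem.List.pyGet? par v = some (par.getD v.toNat 0) :=
      pvGetNonneg par 0 v hvnn (by rw [mid.hplen]; obtain ⟨h1, h2⟩ := hvInR; omega)
    rcases mid.hbits w.toNat (by obtain ⟨h1, h2⟩ := hwInR; omega) with hb0 | hb1
    · -- w unvisited: discovery
      have hwnot : w ∉ done0 ++ v :: (qt ++ newly) := by
        intro hmem
        have := (mid.hmark w hwInR).mpr hmem
        rw [hb0] at this
        exact absurd this (by decide)
      have hw0 : w ≠ 0 := fun he => hwnot (he ▸ h0mem)
      have hred : pvBfsInner v (w :: rest') vis par (qt ++ newly) =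
          pvBfsInner v rest' (PySem.List.pySetD vis w 1) (PySem.List.pySetD par w v)
            ((qt ++ newly) ++ [w]) := by
        simp only [pvBfsInner, hgvw]
        rw [if_pos hb0]
      have hsv : PySem.List.pySetD vis w 1 = vis.set w.toNat 1 :=
        PySem.List.pySetD_of_nonneg vis 1 hwInR.1
      have hsp : PySem.List.pySetD par w v = par.set w.toNat v :=
        PySem.List.pySetD_of_nonneg par v hwInR.1
      have hqassoc : (qt ++ newly) ++ [w] = qt ++ (newly ++ [w]) := by simp
      have hsplit' : adj.getD v.toNat [] = (dn ++ [w]) ++ rest' := by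
        rw [hsplit]; simp
      have hwtne : ∀ x : Int, x ∈ done0 ++ v :: (qt ++ newly) → w.toNat ≠ x.toNat := by
        intro x hx he
        obtain ⟨hx0, -⟩ := mid.hInR x hx
        have : x = w := by obtain ⟨hw0', -⟩ := hwInR; omega
        exact hwnot (this ▸ hx)
      have hordeq : done0 ++ v :: (qt ++ (newly ++ [w])) =
          (done0 ++ v :: (qt ++ newly)) ++ [w] := by simp
      have hmemord' : ∀ x : Int, x ∈ done0 ++ v :: (qt ++ (newly ++ [w])) ↔
          (x ∈ done0 ++ v :: (qt ++ newly) ∨ x = w) := by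
        intro x; rw [hordeq]; simp; tauto
      have hidxold : ∀ x : Int, x ∈ done0 ++ v :: (qt ++ newly) →
          (done0 ++ v :: (qt ++ (newly ++ [w]))).idxOf x =
            (done0 ++ v :: (qt ++ newly)).idxOf x := by
        intro x hx; rw [hordeq]; exact List.idxOf_append_of_mem hx
      have hmid' : BfsMid n E v done0 qt (dn ++ [w]) (newly ++ [w])
          (vis.set w.toNat 1) (par.set w.toNat v) := by
        refine ⟨by simp [mid.hvlen], by simp [mid.hplen], ?_, ?_, ?_, ?_, ?_, ?_, ?_, ?_, ?_, ?_, ?_⟩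
        · -- hbits
          intro k hk
          by_cases hkw : k = w.toNat
          · subst hkw
            rw [pvGetDSetSelf 0 (by rw [mid.hvlen]; omega)]
            exact Or.inr rfl
          · rw [pvGetDSetNe 0 (fun he => hkw he.symm)]
            exact mid.hbits k hk
        · -- hnodup
          rw [hordeq, List.nodup_append]
          refine ⟨hnd, List.nodup_singleton w, ?_⟩
          intro a ha b hb
          have hbw : b = w := List.eq_of_mem_singleton hb
          subst hbw
          intro he
          exact hwnot (he ▸ ha)
        · -- hInR
          intro x hx
          rcases (hmemord' x).mp hx with h | rfl
          · exact mid.hInR x h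
          · exact hwInR
        · -- hmark
          intro x hxR
          by_cases hxw : x = w
          · subst hxw
            rw [pvGetDSetSelf 0 (by rw [mid.hvlen]; obtain ⟨h1, h2⟩ := hxR; omega)]
            simp [hmemord']
          · have hne : w.toNat ≠ x.toNat := by
              obtain ⟨h1, -⟩ := hxR; obtain ⟨h2, -⟩ := hwInR
              intro he; exact hxw (by omega)
            rw [pvGetDSetNe 0 hne, hmemord' x, mid.hmark x hxR]
            simp [hxw]
        · -- hhead
          obtain ⟨t, ht⟩ := mid.hhead
          exact ⟨t ++ [w], by rw [hordeq, ht]; simp⟩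
        · -- hp0
          rw [pvGetDSetNe 0 (fun he => hw0 (by obtain ⟨h1, -⟩ := hwInR; omega))]
          exact mid.hp0
        · -- hpar
          intro x hx hx0
          rcases (hmemord' x).mp hx with hxold | rfl
          · rw [pvGetDSetNe 0 (hwtne x hxold)]
            obtain ⟨hpInR, hpcnt, hplt, hpne⟩ := mid.hpar x hxold hx0
            have hpxmem : par.getD x.toNat 0 ∈ done0 ++ v :: (qt ++ newly) := by
              by_contra hc
              rw [List.idxOf_eq_length hc] at hplt
              have := List.idxOf_lt_length_of_mem hxold
              omega
            refine ⟨hpInR, hpcnt, ?_, hpne⟩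
            rw [hidxold _ hpxmem, hidxold _ hxold]
            exact hplt
          · rw [pvGetDSetSelf 0 (by rw [mid.hplen]; obtain ⟨h1, h2⟩ := hwInR; omega)]
            refine ⟨hvInR, by rw [cnt] at hcw1 ⊢; omega, ?_, hvw⟩
            rw [hidxold v hordv, hordeq, List.idxOf_append_of_notMem hwnot]
            have h1 := List.idxOf_lt_length_of_mem hordv
            simp only [List.idxOf_cons_self, Nat.add_zero]
            omega
        · -- hparold
          intro x hx hx0
          have hxold : x ∈ done0 ++ v :: (qt ++ newly) := by
            rcases List.mem_append.mp hx with h | h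
            · exact List.mem_append_left _ h
            · rcases List.mem_cons.mp h with h | h
              · exact h ▸ hordv
              · exact List.mem_append_right _ (List.mem_cons_of_mem _ (List.mem_append_left _ h))
          rw [pvGetDSetNe 0 (hwtne x hxold)]
          exact mid.hparold x hx hx0
        · -- hparnew
          intro u hu
          rcases List.mem_append.mp hu with hun | huw
          · have humem : u ∈ done0 ++ v :: (qt ++ newly) :=
              List.mem_append_right _ (List.mem_cons_of_mem _ (List.mem_append_right _ hun))
            rw [pvGetDSetNe 0 (hwtne u humem)]
            obtain ⟨hp1, hp2⟩ := mid.hparnew u hun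
            refine ⟨hp1, ?_⟩
            have hz : List.count u [w] = 0 := List.count_eq_zero.mpr
              (fun hmem => hwnot ((List.eq_of_mem_singleton hmem) ▸ humem))
            rw [List.count_append]
            omega
          · have huw : u = w := List.eq_of_mem_singleton huw
            subst huw
            rw [pvGetDSetSelf 0 (by rw [mid.hplen]; obtain ⟨h1, h2⟩ := hwInR; omega)]
            refine ⟨rfl, ?_⟩
            have hdn0 : dn.count u = 0 := by
              by_contra hc
              rcases mid.hdn u (by omega) with h | h
              · by_cases hv0 : v = 0
                · rw [hv0] at h
                  simp only [Int.toNat_zero] at h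
                  rw [mid.hp0] at h
                  exact hw0 h
                · exact hwnot (h ▸ List.mem_append_left _ (hparv_mem hv0))
              · exact hwnot (List.mem_append_right _
                  (List.mem_cons_of_mem _ (List.mem_append_right _ h)))
            rw [List.count_append, hdn0, List.count_cons_self, List.count_nil]
        · -- hproc
          intro u hu w' hw'
          obtain ⟨hmem, hshape⟩ := mid.hproc u hu w' hw'
          have humem : u ∈ done0 ++ v :: (qt ++ newly) := List.mem_append_left _ hu
          have hw'mem : w' ∈ done0 ++ v :: (qt ++ newly) := by
            rcases List.mem_append.mp hmem with h | h
            · exact List.mem_append_left _ h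
            · rcases List.mem_cons.mp h with h | h
              · exact h ▸ hordv
              · exact List.mem_append_right _ (List.mem_cons_of_mem _ (List.mem_append_left _ h))
          rw [pvGetDSetNe 0 (hwtne u humem), pvGetDSetNe 0 (hwtne w' hw'mem)]
          exact ⟨hmem, hshape⟩
        · -- hdn
          intro w' hw'
          rw [List.count_append] at hw'
          rw [pvGetDSetNe 0 (hwtne v hordv)]
          by_cases hww' : w' = w
          · subst hww'
            exact Or.inr (List.mem_append_right _ (List.mem_singleton_self w'))
          · have hz : List.count w' [w] = 0 := List.count_eq_zero.mpr
              (fun hmem => hww' (List.eq_of_mem_singleton hmem))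
            rcases mid.hdn w' (by omega) with h | h
            · exact Or.inl h
            · exact Or.inr (List.mem_append_left _ h)
      have hihres := ih (dn ++ [w]) (vis.set w.toNat 1) (par.set w.toNat v)
        (newly ++ [w]) hsplit' hmid'
      rw [hred, hsv, hsp, hqassoc]
      refine ⟨hihres.1, hihres.2.1, ?_⟩
      intro vis' par' q' h
      obtain ⟨newly2, hq, hmid2⟩ := hihres.2.2 vis' par' q' h
      refine ⟨newly2, hq, ?_⟩
      have heq : (dn ++ [w]) ++ rest' = dn ++ w :: rest' := by simp
      rw [← heq]
      exact hmid2
    · -- w already visited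
      have hwmem : w ∈ done0 ++ v :: (qt ++ newly) := (mid.hmark w hwInR).mp hb1
      by_cases hfire : w = par.getD v.toNat 0
      · -- w is the parent of v: skip
        have hred : pvBfsInner v (w :: rest') vis par (qt ++ newly) =
            pvBfsInner v rest' vis par (qt ++ newly) := by
          simp only [pvBfsInner, hgvw, hpv]
          rw [if_neg (by rw [hb1]; decide), if_neg (fun hne => hne hfire)]
        have hsplit' : adj.getD v.toNat [] = (dn ++ [w]) ++ rest' := by
          rw [hsplit]; simp
        have hwnotnew : w ∉ newly := by
          intro hc
          by_cases hv0 : v = 0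
          · rw [hv0] at hfire
            simp only [Int.toNat_zero] at hfire
            rw [mid.hp0] at hfire
            exact pvNodupNotBoth hndC
              (List.mem_append_right _ (hv0 ▸ hfire ▸ List.mem_cons_self)) hc
          · exact pvNodupNotBoth hndC (List.mem_append_left _ (hfire ▸ hparv_mem hv0)) hc
        have hmid' : BfsMid n E v done0 qt (dn ++ [w]) newly vis par := by
          refine ⟨mid.hvlen, mid.hplen, mid.hbits, mid.hnodup, mid.hInR, mid.hmark,
            mid.hhead, mid.hp0, mid.hpar, mid.hparold, ?_, mid.hproc, ?_⟩
          · intro u hu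
            obtain ⟨hp1, hp2⟩ := mid.hparnew u hu
            refine ⟨hp1, ?_⟩
            have hz : List.count u [w] = 0 := List.count_eq_zero.mpr
              (fun hmem => hwnotnew ((List.eq_of_mem_singleton hmem) ▸ hu))
            rw [List.count_append]
            omega
          · intro w' hw'
            rw [List.count_append] at hw'
            by_cases hww' : w' = w
            · subst hww'
              exact Or.inl hfire
            · have hz : List.count w' [w] = 0 := List.count_eq_zero.mpr
                (fun hmem => hww' (List.eq_of_mem_singleton hmem))
              rcases mid.hdn w' (by omega) with h | h
              · exact Or.inl h
              · exact Or.inr h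
        have hihres := ih (dn ++ [w]) vis par newly hsplit' hmid'
        rw [hred]
        refine ⟨hihres.1, hihres.2.1, ?_⟩
        intro vis' par' q' h
        obtain ⟨newly2, hq, hmid2⟩ := hihres.2.2 vis' par' q' h
        refine ⟨newly2, hq, ?_⟩
        have heq : (dn ++ [w]) ++ rest' = dn ++ w :: rest' := by simp
        rw [← heq]
        exact hmid2
      · -- fire
        have hred : pvBfsInner v (w :: rest') vis par (qt ++ newly) = .fired := by
          simp only [pvBfsInner, hgvw, hpv]
          rw [if_neg (by rw [hb1]; decide), if_pos (fun he => hfire he)]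
        rw [hred]
        refine ⟨fun h => PvStep.noConfusion h, fun _ => ?_,
          fun vis' par' q' h => PvStep.noConfusion h⟩
        by_cases hpw : par.getD w.toNat 0 = v
        · -- parallel edge between v and w
          have hw0 : w ≠ 0 := by
            intro he
            rw [he] at hpw
            simp only [Int.toNat_zero] at hpw
            rw [mid.hp0] at hpw
            rw [he, ← hpw] at hvw
            exact hvw rfl
          have hwnew : w ∈ newly := by
            by_contra hc
            have hwold : w ∈ done0 ++ v :: qt := by
              rcases List.mem_append.mp hwmem with h | h
              · exact List.mem_append_left _ h
              · rcases List.mem_cons.mp h with h | h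
                · exact List.mem_append_right _ (h ▸ List.mem_cons_self)
                · rcases List.mem_append.mp h with h2 | h2
                  · exact List.mem_append_right _ (List.mem_cons_of_mem _ h2)
                  · exact absurd h2 hc
            have hpd := mid.hparold w hwold hw0
            rw [hpw] at hpd
            exact hvnotd hpd
          obtain ⟨-, hcnt1⟩ := mid.hparnew w hwnew
          have h2c : 2 ≤ cnt E v w := by
            rw [hcntw, List.count_append, List.count_cons_self]
            omega
          exact badErase_of_two hvw h2c
        · exact badErase_of_fire (n := n) (done0 ++ v :: (qt ++ newly)) par mid.hhead
            (by
              intro x hx hx0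
              refine ⟨(mid.hpar x hx hx0).2.2.1, ?_⟩
              rcases List.mem_append.mp hx with h | h
              · exact List.mem_append_left _ (mid.hparold x (List.mem_append_left _ h) hx0)
              · rcases List.mem_cons.mp h with h | h
                · subst h
                  exact List.mem_append_left _ (mid.hparold x (by simp) hx0)
                · rcases List.mem_append.mp h with h2 | h2
                  · exact List.mem_append_left _ (mid.hparold x
                      (List.mem_append_right _ (List.mem_cons_of_mem _ h2)) hx0)
                  · rw [(mid.hparnew x h2).1]
                    exact hordv)
            (fun x hx hx0 => (mid.hpar x hx hx0).2.1)
            hordv hwmem hcw1 hfire hpw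

lemma bfsMid_final {n : Int} {E : List (Int × Int)} (hG : Good n E) {adj : List (List Int)}
    (hA : Adjy n E adj) {v : Int} {done0 qt newly vis par : List Int}
    (mid : BfsMid n E v done0 qt (adj.getD v.toNat []) newly vis par) :
    BfsInv n E vis par (done0 ++ [v]) (qt ++ newly) := by
  have hoeq : (done0 ++ [v]) ++ (qt ++ newly) = done0 ++ v :: (qt ++ newly) := by simp
  have hordv : v ∈ done0 ++ v :: (qt ++ newly) := by simp
  have hvInR : InR n v := mid.hInR v hordv
  have hndC : ((done0 ++ v :: qt) ++ newly).Nodup := by simpa using mid.hnodup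
  have h0mem : (0 : Int) ∈ done0 ++ v :: (qt ++ newly) := by
    obtain ⟨t, ht⟩ := mid.hhead; rw [ht]; exact List.mem_cons_self
  have holdmem : ∀ x : Int, x ∈ done0 ++ v :: qt → x ∈ done0 ++ v :: (qt ++ newly) := by
    intro x hx
    rcases List.mem_append.mp hx with h | h
    · exact List.mem_append_left _ h
    · rcases List.mem_cons.mp h with h | h
      · exact h ▸ hordv
      · exact List.mem_append_right _ (List.mem_cons_of_mem _ (List.mem_append_left _ h))
  refine ⟨mid.hvlen, mid.hplen, mid.hbits, by rw [hoeq]; exact mid.hnodup,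
    by rw [hoeq]; exact mid.hInR, by rw [hoeq]; exact mid.hmark,
    by rw [hoeq]; exact mid.hhead, mid.hp0, ?_, ?_⟩
  · -- hpar
    intro x hx hx0
    rw [hoeq] at hx ⊢
    obtain ⟨hpInR, hpcnt, hplt, hpne⟩ := mid.hpar x hx hx0
    refine ⟨hpInR, ?_, hpcnt, hplt, hpne⟩
    rcases List.mem_append.mp hx with h | h
    · exact List.mem_append_left _ (mid.hparold x (List.mem_append_left _ h) hx0)
    · rcases List.mem_cons.mp h with h | h
      · subst h
        exact List.mem_append_left _ (mid.hparold x (by simp) hx0)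
      · rcases List.mem_append.mp h with h2 | h2
        · exact List.mem_append_left _ (mid.hparold x
            (List.mem_append_right _ (List.mem_cons_of_mem _ h2)) hx0)
        · rw [(mid.hparnew x h2).1]
          exact List.mem_append_right _ (List.mem_singleton_self v)
  · -- hproc
    intro u hu w hw
    rw [hoeq]
    rcases List.mem_append.mp hu with hud | huv
    · obtain ⟨hmem, hshape⟩ := mid.hproc u hud w hw
      exact ⟨holdmem w hmem, hshape⟩
    · have huv : u = v := List.eq_of_mem_singleton huv
      subst huv
      have hdncnt : (adj.getD u.toNat []).count w = cnt E u w := hA.2 u hvInR w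
      rcases mid.hdn w (by omega) with h | h
      · -- w is u's parent
        by_cases hu0 : u = 0
        · exfalso
          rw [hu0] at h
          simp only [Int.toNat_zero] at h
          rw [mid.hp0] at h
          subst h
          rw [hu0] at hw
          rw [cnt] at hw
          have : ((0 : Int), (0 : Int)) ∉ E := fun hm => (hG _ hm).2.2 rfl
          have := List.count_eq_zero.mpr this
          omega
        · exact ⟨h ▸ List.mem_append_left _ (mid.hparold u (by simp) hu0), Or.inl h⟩
      · -- w was discovered from u
        obtain ⟨hp1, hp2⟩ := mid.hparnew w h
        have hw0 : w ≠ 0 := by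
          intro he
          have h0old : (0 : Int) ∈ done0 ++ u :: qt := by
            obtain ⟨t, ht⟩ := mid.hhead
            cases done0 with
            | nil =>
              simp only [List.nil_append] at ht ⊢
              injection ht with h1 _
              exact h1 ▸ List.mem_cons_self
            | cons c d =>
              simp only [List.cons_append] at ht
              injection ht with h1 _
              exact List.mem_append_left _ (h1 ▸ List.mem_cons_self)
          exact pvNodupNotBoth hndC h0old (he ▸ h)
        exact ⟨List.mem_append_right _ (List.mem_cons_of_mem _ (List.mem_append_right _ h)),
          Or.inr ⟨hp1, hw0, by rw [← hdncnt]; exact hp2⟩⟩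

lemma pvSetKeep {l : List Int} {k : Nat} (hk : k < l.length) (he : l.getD k 0 = 1) :
    l.set k 1 = l := by
  apply List.ext_getElem (by simp)
  intro i h1 h2
  rw [List.getElem_set]
  split_ifs with hik
  · subst hik
    rw [List.getD_eq_getElem _ 0 hk] at he
    exact he.symm
  · rfl

lemma pvRepGetD (m k : Nat) : (List.replicate m (0 : Int)).getD k 0 = 0 := by
  rw [List.getD]
  rcases Nat.lt_or_ge k m with h | h
  · rw [List.getElem?_eq_getElem (by simpa using h)]
    simp
  · rw [List.getElem?_eq_none (by simpa using h)]
    rfl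

-- entering a pop: the invariant at the start of processing adj_list[v]
lemma pvBfsStart {n : Int} {E : List (Int × Int)} {vis par : List Int} {v : Int}
    {qt done : List Int}
    (h : BfsInv n E vis par done (v :: qt) ∨
      (done = [] ∧ 1 ≤ n ∧ vis = List.replicate n.toNat 0 ∧
        par = List.replicate n.toNat 0 ∧ v :: qt = [0])) :
    InR n v ∧ BfsMid n E v done qt [] [] (PySem.List.pySetD vis v 1) par := by
  rcases h with inv | ⟨hd, hn1, hv, hp, hq⟩
  · have hvm : v ∈ done ++ v :: qt := List.mem_append_right _ List.mem_cons_self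
    have hvInR : InR n v := inv.hInR v hvm
    have hmk : vis.getD v.toNat 0 = 1 := (inv.hmark v hvInR).mpr hvm
    have hset : PySem.List.pySetD vis v 1 = vis := by
      rw [PySem.List.pySetD_of_nonneg vis 1 hvInR.1]
      exact pvSetKeep (by rw [inv.hvlen]; obtain ⟨h1, h2⟩ := hvInR; omega) hmk
    rw [hset]
    refine ⟨hvInR, ?_⟩
    refine ⟨inv.hvlen, inv.hplen, inv.hbits, by rw [List.append_nil]; exact inv.hnodup,
      by rw [List.append_nil]; exact inv.hInR, by rw [List.append_nil]; exact inv.hmark,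
      by rw [List.append_nil]; exact inv.hhead, inv.hp0, ?_, ?_, by simp, inv.hproc, by simp⟩
    · intro x hx hx0
      rw [List.append_nil] at hx ⊢
      obtain ⟨h1, -, h3, h4, h5⟩ := inv.hpar x hx hx0
      exact ⟨h1, h3, h4, h5⟩
    · intro x hx hx0
      exact (inv.hpar x hx hx0).2.1
  · injection hq with hq1 hq2
    subst hq1; subst hq2; subst hd; subst hv; subst hp
    have hset : PySem.List.pySetD (List.replicate n.toNat (0 : Int)) 0 1 =
        (List.replicate n.toNat (0 : Int)).set 0 1 := by
      rw [PySem.List.pySetD_of_nonneg _ 1 (le_refl 0)]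
      simp
    rw [hset]
    have hInR0 : InR n 0 := ⟨le_refl 0, by omega⟩
    have hlen : (List.replicate n.toNat (0 : Int)).length = n.toNat := by simp
    refine ⟨hInR0, ?_⟩
    refine ⟨by simp, by simp, ?_, by simp, ?_, ?_, ⟨[], by simp⟩, pvRepGetD _ _,
      ?_, ?_, by simp, by simp, by simp⟩
    · -- hbits
      intro k hk
      by_cases hk0 : k = 0
      · subst hk0
        rw [pvGetDSetSelf 0 (by rw [hlen]; omega)]
        exact Or.inr rfl
      · rw [pvGetDSetNe 0 (fun he => hk0 he.symm), pvRepGetD]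
        exact Or.inl rfl
    · -- hInR
      intro x hx
      simp only [List.nil_append, List.append_nil] at hx
      rcases List.mem_cons.mp hx with h | h
      · exact h ▸ hInR0
      · simp at h
    · -- hmark
      intro x hxR
      by_cases hx0 : x = 0
      · subst hx0
        rw [show (0 : Int).toNat = 0 from rfl, pvGetDSetSelf 0 (by rw [hlen]; omega)]
        simp
      · have : (0 : Nat) ≠ x.toNat := by
          obtain ⟨h1, -⟩ := hxR
          intro he; exact hx0 (by omega)
        rw [pvGetDSetNe 0 this, pvRepGetD]
        constructor
        · intro h; exact absurd h (by decide)
        · intro h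
          simp only [List.nil_append, List.append_nil] at h
          rcases List.mem_cons.mp h with h | h
          · exact absurd h hx0
          · simp at h
    · -- hpar
      intro x hx hx0
      simp only [List.nil_append, List.append_nil] at hx
      rcases List.mem_cons.mp hx with h | h
      · exact absurd h hx0
      · simp at h
    · -- hparold
      intro x hx hx0
      simp only [List.nil_append, List.append_nil] at hx
      rcases List.mem_cons.mp hx with h | h
      · exact absurd h hx0
      · simp at h

-- outcome of the whole BFS run
lemma pvBfs_spec {n : Int} {E : List (Int × Int)} (hG : Good n E) {adj : List (List Int)}
    (hA : Adjy n E adj) :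
    ∀ vis par q, ∀ done,
    (BfsInv n E vis par done q ∨
      (done = [] ∧ 1 ≤ n ∧ vis = List.replicate n.toNat 0 ∧
        par = List.replicate n.toNat 0 ∧ q = [0])) →
    (((pvBfs adj vis par q).1 = true → BadErase E) ∧
     ((pvBfs adj vis par q).1 = false → ∃ ordF,
       BfsInv n E (pvBfs adj vis par q).2.1 (pvBfs adj vis par q).2.2 ordF [] ∧
       ∀ x ∈ done ++ q, x ∈ ordF)) := by
  intro vis par q
  fun_induction pvBfs adj vis par q with
  | case1 vis par =>
    intro done hinv
    refine ⟨by intro h; simp at h, fun _ => ⟨done, ?_, by simp⟩⟩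
    rcases hinv with inv | ⟨-, -, -, -, hq⟩
    · exact inv
    · cases hq
  | case2 vis par v qt vis1 hget =>
    intro done hinv
    obtain ⟨hvInR, hmid⟩ := pvBfsStart hinv
    have := pvGetNonneg adj [] v hvInR.1 (by rw [hA.1]; obtain ⟨h1, h2⟩ := hvInR; omega)
    rw [hget] at this
    cases this
  | case3 vis par v qt vis1 nbrs hget hfired =>
    intro done hinv
    obtain ⟨hvInR, hmid⟩ := pvBfsStart hinv
    have hsome := pvGetNonneg adj [] v hvInR.1 (by rw [hA.1]; obtain ⟨h1, h2⟩ := hvInR; omega)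
    rw [hget] at hsome
    have hnbrs : adj.getD v.toNat [] = nbrs := by injection hsome with h; exact h.symm
    have hspec := pvBfsInner_spec hG hA v done qt nbrs [] vis1 par []
      (by simpa using hnbrs) hmid
    rw [List.append_nil] at hspec
    exact ⟨fun _ => hspec.2.1 hfired, by intro h; simp at h⟩
  | case4 vis par v qt vis1 nbrs hget herr =>
    intro done hinv
    obtain ⟨hvInR, hmid⟩ := pvBfsStart hinv
    have hsome := pvGetNonneg adj [] v hvInR.1 (by rw [hA.1]; obtain ⟨h1, h2⟩ := hvInR; omega)
    rw [hget] at hsome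
    have hnbrs : adj.getD v.toNat [] = nbrs := by injection hsome with h; exact h.symm
    have hspec := pvBfsInner_spec hG hA v done qt nbrs [] vis1 par []
      (by simpa using hnbrs) hmid
    rw [List.append_nil] at hspec
    exact absurd herr hspec.1
  | case5 vis par v qt vis1 nbrs hget vis2 par2 q2 hnext ih =>
    intro done hinv
    obtain ⟨hvInR, hmid⟩ := pvBfsStart hinv
    have hsome := pvGetNonneg adj [] v hvInR.1 (by rw [hA.1]; obtain ⟨h1, h2⟩ := hvInR; omega)
    rw [hget] at hsome
    have hnbrs : adj.getD v.toNat [] = nbrs := by injection hsome with h; exact h.symm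
    have hspec := pvBfsInner_spec hG hA v done qt nbrs [] vis1 par []
      (by simpa using hnbrs) hmid
    rw [List.append_nil] at hspec
    obtain ⟨newly2, hq2, hmid2⟩ := hspec.2.2 vis2 par2 q2 hnext
    have hmid2' : BfsMid n E v done qt (adj.getD v.toNat []) newly2 vis2 par2 := by
      rw [hnbrs]
      simpa using hmid2
    have hinv2 : BfsInv n E vis2 par2 (done ++ [v]) q2 := by
      rw [hq2]
      exact bfsMid_final hG hA hmid2'
    obtain ⟨hc1, hc2⟩ := ih (done ++ [v]) (Or.inl hinv2)
    refine ⟨hc1, fun hfalse => ?_⟩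
    obtain ⟨ordF, hinvF, hsub⟩ := hc2 hfalse
    refine ⟨ordF, hinvF, ?_⟩
    intro x hx
    apply hsub
    rw [hq2]
    rcases List.mem_append.mp hx with h | h
    · exact List.mem_append_left _ (List.mem_append_left _ h)
    · rcases List.mem_cons.mp h with h | h
      · exact List.mem_append_left _ (List.mem_append_right _ (h ▸ List.mem_singleton_self v))
      · exact List.mem_append_right _ (List.mem_append_left _ h)

-- a finished BFS has explored whole components
lemma conn_ord_closed {n : Int} {E : List (Int × Int)} {vis par ordF : List Int}
    (inv : BfsInv n E vis par ordF []) :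
    ∀ x y, Conn E x y → (x ∈ ordF ↔ y ∈ ordF) := by
  intro x y h
  induction h with
  | refl x => exact Iff.rfl
  | @base a b hm =>
    constructor
    · intro ha
      have hc := List.count_pos_iff.mpr hm
      have hcnt : 1 ≤ cnt E a b := by rw [cnt]; omega
      have := (inv.hproc a ha b hcnt).1
      simpa using this
    · intro hb
      have hc := List.count_pos_iff.mpr hm
      have hcnt : 1 ≤ cnt E b a := by rw [cnt]; omega
      have := (inv.hproc b hb a hcnt).1
      simpa using this
  | symm _ ih => exact ih.symm
  | trans _ _ ih1 ih2 => exact ih1.trans ih2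

lemma pvCountPair (l : List (Int × Int)) (u w : Int × Int) (hne : u ≠ w) :
    l.countP (fun p => decide (p = u ∨ p = w)) = l.count u + l.count w := by
  induction l with
  | nil => simp
  | cons a t ih =>
    rw [List.countP_cons, List.count_cons, List.count_cons, ih]
    by_cases h1 : a = u
    · subst h1
      simp [hne, show ¬ w = a from fun h => hne h.symm]
      omega
    · by_cases h2 : a = w
      · subst h2
        simp [h1, show ¬ u = a from fun h => h1 h.symm]
        omega
      · simp [h1, h2]

lemma pvLengthFiber (l : List (Int × Int)) (T : Finset Int) (f : Int × Int → Int)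
    (hf : ∀ a ∈ l, f a ∈ T) : l.length = ∑ x ∈ T, l.countP (fun p => decide (f p = x)) := by
  induction l with
  | nil => simp
  | cons a t ih =>
    have hft : ∀ b ∈ t, f b ∈ T := fun b hb => hf b (List.mem_cons_of_mem _ hb)
    simp only [List.countP_cons, List.length_cons]
    rw [Finset.sum_add_distrib, ← ih hft]
    have : ∑ x ∈ T, (if decide (f a = x) = true then 1 else 0) = 1 := by
      have := Finset.sum_ite_eq T (f a) (fun _ => 1)
      simp only [decide_eq_true_eq]
      rw [Finset.sum_congr rfl (fun x _ => by rfl)]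
      rw [show (fun x => if f a = x then 1 else 0) = fun x => if f a = x then (fun _ => 1) x else 0 from rfl] at *
      rw [this]
      simp [hf a List.mem_cons_self]
    omega

-- counting: if every vertex was discovered, E has exactly n-1 edges (each a tree edge once)
lemma bfs_count {n : Int} {E : List (Int × Int)} (hG : Good n E) {vis par ordF : List Int}
    (inv : BfsInv n E vis par ordF []) (hall : ∀ x, InR n x → x ∈ ordF) :
    E.length + 1 = n.toNat := by
  classical
  have hq : ordF ++ ([] : List Int) = ordF := List.append_nil _
  have hmemInR : ∀ x ∈ ordF, InR n x := by
    have := inv.hInR; rw [hq] at this; exact this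
  have hnd : ordF.Nodup := by have := inv.hnodup; rwa [hq] at this
  obtain ⟨t0, hhead⟩ : ∃ t, ordF = 0 :: t := by have := inv.hhead; rwa [hq] at this
  have h0mem : (0 : Int) ∈ ordF := by rw [hhead]; exact List.mem_cons_self
  have hn1 : 1 ≤ n := by have := (hmemInR 0 h0mem).2; omega
  have hpar : ∀ x ∈ ordF, x ≠ 0 → InR n (par.getD x.toNat 0) ∧ par.getD x.toNat 0 ∈ ordF ∧
      1 ≤ cnt E x (par.getD x.toNat 0) ∧ ordF.idxOf (par.getD x.toNat 0) < ordF.idxOf x ∧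
      par.getD x.toNat 0 ≠ x := by
    intro x hx hx0
    have := inv.hpar x (by rw [hq]; exact hx) hx0
    rwa [hq] at this
  have hproc : ∀ u ∈ ordF, ∀ w, 1 ≤ cnt E u w → w ∈ ordF ∧ (w = par.getD u.toNat 0 ∨
      (par.getD w.toNat 0 = u ∧ w ≠ 0 ∧ cnt E u w = 1)) := by
    intro u hu w hw
    have := inv.hproc u hu w hw
    rwa [hq] at this
  have hnomut : ∀ x ∈ ordF, x ≠ 0 → par.getD (par.getD x.toNat 0).toNat 0 ≠ x := by
    intro x hx hx0 hmut
    by_cases hpx0 : par.getD x.toNat 0 = 0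
    · rw [hpx0] at hmut
      simp only [Int.toNat_zero] at hmut
      rw [inv.hp0] at hmut
      exact hx0 hmut.symm
    · obtain ⟨-, hpxm, -, hlt1, -⟩ := hpar x hx hx0
      obtain ⟨-, -, -, hlt2, -⟩ := hpar _ hpxm hpx0
      rw [hmut] at hlt2
      omega
  have hcnt1 : ∀ x ∈ ordF, x ≠ 0 →
      E.count (par.getD x.toNat 0, x) + E.count (x, par.getD x.toNat 0) = 1 := by
    intro x hx hx0
    obtain ⟨-, hpxm, hcge, -, -⟩ := hpar x hx hx0
    have hcomm : 1 ≤ cnt E (par.getD x.toNat 0) x := by rw [cnt] at hcge ⊢; omega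
    rcases (hproc _ hpxm x hcomm).2 with h | ⟨-, -, hone⟩
    · exact absurd h.symm (hnomut x hx hx0)
    · rw [cnt] at hone
      omega
  set T := ordF.toFinset.erase 0 with hT
  have hmemT : ∀ x, x ∈ T ↔ (x ∈ ordF ∧ x ≠ 0) := by
    intro x
    rw [hT, Finset.mem_erase, List.mem_toFinset]
    tauto
  have hchild : ∀ p ∈ E,
      (if par.getD p.2.toNat 0 = p.1 then p.2 else p.1) ∈ T ∧
      ∀ x ∈ T, ((if par.getD p.2.toNat 0 = p.1 then p.2 else p.1) = x ↔
        (p = (par.getD x.toNat 0, x) ∨ p = (x, par.getD x.toNat 0))) := by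
    rintro ⟨a, b⟩ hm
    obtain ⟨haR, hbR, hab⟩ := hG (a, b) hm
    have ham : a ∈ ordF := hall a haR
    have hbm : b ∈ ordF := hall b hbR
    have hcab : 1 ≤ cnt E a b := by
      have := List.count_pos_iff.mpr hm
      rw [cnt]; omega
    have hshape := (hproc a ham b hcab).2
    show (if par.getD b.toNat 0 = a then b else a) ∈ T ∧
      ∀ x ∈ T, ((if par.getD b.toNat 0 = a then b else a) = x ↔
        ((a, b) = (par.getD x.toNat 0, x) ∨ (a, b) = (x, par.getD x.toNat 0)))
    by_cases hpb : par.getD b.toNat 0 = a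
    · -- child = b
      have hb0 : b ≠ 0 := by
        intro he
        rw [he] at hpb
        simp only [Int.toNat_zero] at hpb
        rw [inv.hp0] at hpb
        exact hab (by rw [← hpb, he])
      rw [if_pos hpb]
      refine ⟨(hmemT b).mpr ⟨hbm, hb0⟩, ?_⟩
      intro x hx
      constructor
      · rintro rfl
        refine Or.inl ?_
        rw [hpb]
      · rintro (he | he)
        · injection he with h1 h2
          try exact h2.symm
        · injection he with h1 h2
          exfalso
          obtain ⟨hxm, hx0⟩ := (hmemT x).mp hx
          apply hnomut x hxm hx0
          rw [← h2, hpb, h1]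
    · -- child = a
      have hbpa : b = par.getD a.toNat 0 := by
        rcases hshape with h | ⟨h, -, -⟩
        · exact h
        · exact absurd h hpb
      have ha0 : a ≠ 0 := by
        intro he
        rw [he] at hbpa
        simp only [Int.toNat_zero] at hbpa
        rw [inv.hp0] at hbpa
        exact hab (by rw [he, hbpa])
      rw [if_neg hpb]
      refine ⟨(hmemT a).mpr ⟨ham, ha0⟩, ?_⟩
      intro x hx
      constructor
      · rintro rfl
        refine Or.inr ?_
        rw [← hbpa]
      · rintro (he | he)
        · injection he with h1 h2
          exfalso
          apply hpb
          rw [h2, ← h1]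
        · injection he with h1 h2
          try exact h1.symm
  have hsum : E.length = ∑ x ∈ T,
      E.countP (fun p => decide ((if par.getD p.2.toNat 0 = p.1 then p.2 else p.1) = x)) := by
    apply pvLengthFiber
    intro p hp
    exact (hchild p hp).1
  have hfib1 : ∀ x ∈ T,
      E.countP (fun p => decide ((if par.getD p.2.toNat 0 = p.1 then p.2 else p.1) = x)) = 1 := by
    intro x hx
    obtain ⟨hxm, hx0⟩ := (hmemT x).mp hx
    have hpxx : par.getD x.toNat 0 ≠ x := (hpar x hxm hx0).2.2.2.2
    have hne : ((par.getD x.toNat 0, x) : Int × Int) ≠ (x, par.getD x.toNat 0) := by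
      intro hc
      injection hc with h1 h2
      exact hpxx h1
    rw [List.countP_congr ?_, pvCountPair E _ _ hne, hcnt1 x hxm hx0]
    intro p hp
    simp only [decide_eq_true_eq]
    exact (hchild p hp).2 x hx
  rw [Finset.sum_congr rfl hfib1] at hsum
  simp only [Finset.sum_const, smul_eq_mul, Nat.mul_one] at hsum
  have hTcard : T.card = ordF.length - 1 := by
    rw [hT, Finset.card_erase_of_mem (List.mem_toFinset.mpr h0mem),
      List.toFinset_card_of_nodup hnd]
  have hlenF : ordF.length = n.toNat := by
    have hperm : ordF.Perm (PySem.List.pyRange 0 n 1) := by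
      rw [List.perm_ext_iff_of_nodup hnd (PySem.List.nodup_pyRange_one 0 n)]
      intro a
      rw [PySem.List.mem_pyRange_one]
      constructor
      · intro h; exact (hmemInR a h)
      · intro h; exact hall a h
    rw [hperm.length_eq, PySem.List.length_pyRange_one]
    simp
  have h0len : 0 < ordF.length := by rw [hhead]; simp
  omega

-- ---- assembling the pieces ----

-- the remaining iterations of the component loop (one component already found)
lemma pvScan_rest {n : Int} (adj : List (List Int)) :
    ∀ (is : List Int) (vis par : List Int) (c : Int), 0 < c →
    (∀ i ∈ is, InR n i) → vis.length = n.toNat →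
    (pvScan adj is vis par c = true ↔ ∀ i ∈ is, vis.getD i.toNat 0 ≠ 0) := by
  intro is
  induction is with
  | nil => intro vis par c hc hInr hlen; simp [pvScan]
  | cons i rest ih =>
    intro vis par c hc hInr hlen
    have hiR := hInr i List.mem_cons_self
    have hg : PySem.List.pyGet? vis i = some (vis.getD i.toNat 0) :=
      pvGetNonneg vis 0 i hiR.1 (by rw [hlen]; obtain ⟨h1, h2⟩ := hiR; omega)
    simp only [pvScan, hg]
    by_cases hz : vis.getD i.toNat 0 = 0
    · rw [if_pos hz, if_pos (by omega : c > 0)]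
      constructor
      · intro h; cases h
      · intro hall2
        exact absurd hz (hall2 i List.mem_cons_self)
    · rw [if_neg hz,
        ih vis par c hc (fun j hj => hInr j (List.mem_cons_of_mem _ hj)) hlen]
      constructor
      · intro h j hj
        rcases List.mem_cons.mp hj with h1 | h1
        · exact h1 ▸ hz
        · exact h j h1
      · intro h j hj
        exact h j (List.mem_cons_of_mem _ hj)

-- every vertex the finished BFS discovered is connected to the root
lemma inv_allConn {n : Int} {E : List (Int × Int)} {vis par ordF : List Int}
    (inv : BfsInv n E vis par ordF []) : ∀ x ∈ ordF, Conn E 0 x := by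
  have hq := List.append_nil ordF
  have hhead : ∃ t, ordF = 0 :: t := by have := inv.hhead; rwa [hq] at this
  have hpar' : ∀ x ∈ ordF, x ≠ 0 →
      ordF.idxOf (par.getD x.toNat 0) < ordF.idxOf x ∧ par.getD x.toNat 0 ∈ ordF := by
    intro x hx hx0
    have h := inv.hpar x (by rw [hq]; exact hx) hx0
    rw [hq] at h
    exact ⟨h.2.2.2.1, h.2.1⟩
  have hPL := conn_parPairs ordF par hhead hpar'
  intro x hx
  refine conn_map ?_ (hPL x hx)
  intro p hp
  rw [parPairs] at hp
  obtain ⟨y, hyf, rfl⟩ := List.mem_map.mp hp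
  obtain ⟨hyo, hy0'⟩ := List.mem_filter.mp hyf
  have hy0 : y ≠ 0 := by simpa using hy0'
  have hcy : 1 ≤ cnt E y (par.getD y.toNat 0) := by
    have h := inv.hpar y (by rw [hq]; exact hyo) hy0
    exact h.2.2.1
  rw [cnt] at hcy
  rcases Nat.lt_or_ge 0 (E.count (y, par.getD y.toNat 0)) with h1 | h1
  · exact Conn.base (List.count_pos_iff.mp h1)
  · have h2 : 0 < E.count (par.getD y.toNat 0, y) := by omega
    exact Conn.symm (Conn.base (List.count_pos_iff.mp h2))

-- ===== VERDICT (by name: the statement is the Claim_ definition above) =====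
theorem is_it_a_tree_spec : Claim_equal_is_it_a_tree := by
  intro n es ee hDom hPre
  rw [Spec_is_it_a_tree]
  obtain ⟨hn0, hPre2⟩ := hPre
  by_cases hsl : ∃ k, k < es.length ∧ k < ee.length ∧ es.getD k 0 = ee.getD k 0
  · -- there is a (first) self-loop edge: both programs return False there
    have hkp := Nat.find_spec hsl
    set k := Nat.find hsl with hkdef
    obtain ⟨hk1, hk2, hk3⟩ := hkp
    have hfirst : ∀ j, j < k → ¬ (j < ee.length ∧ es.getD j 0 = ee.getD j 0) := by
      intro j hj hcon
      exact Nat.find_min hsl hj ⟨by omega, hcon.1, hcon.2⟩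
    have hk3' : es[k] = ee[k] := by
      rw [← List.getD_eq_getElem es 0 hk1, ← List.getD_eq_getElem ee 0 hk2]
      exact hk3
    have hA : is_it_a_tree n es ee = false := by
      simp only [is_it_a_tree]
      rw [pvBuild_eq_none es ee k hk1 hk2 hk3 hfirst]
    have hB : is_it_a_tree_alt n es ee = false := by
      rw [is_it_a_tree_alt]
      apply pvUF_false_of_selfloop
      refine ⟨es[k], ?_⟩
      have hzl : k < (es.zip ee).length := by rw [List.length_zip]; omega
      rw [List.mem_iff_getElem]
      refine ⟨k, hzl, ?_⟩
      rw [List.getElem_zip, hk3']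
    rw [hA, hB]
  · -- no self-loop: the graph case
    have hgood : ∀ i, i < es.length → i < ee.length ∧
        (0 ≤ es.getD i 0 ∧ es.getD i 0 < n ∧ 0 ≤ ee.getD i 0 ∧ ee.getD i 0 < n) ∧
        es.getD i 0 ≠ ee.getD i 0 := by
      intro i hi
      have hguard : ∀ j, j < i → ¬ (j < ee.length ∧ es.getD j 0 = ee.getD j 0) := by
        intro j hj hcon
        exact hsl ⟨j, by omega, hcon.1, hcon.2⟩
      obtain ⟨hlt, hor⟩ := hPre2 i hi hguard
      refine ⟨hlt, ?_, fun he => hsl ⟨i, hi, hlt, he⟩⟩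
      rcases hor with h | h
      · exact absurd ⟨i, hi, hlt, h⟩ hsl
      · exact h
    have hle : es.length ≤ ee.length := by
      rcases Nat.eq_zero_or_pos es.length with h | h
      · omega
      · have := (hgood (es.length - 1) (by omega)).1; omega
    have hzlen : (es.zip ee).length = es.length := by rw [List.length_zip]; omega
    have hG : Good n (es.zip ee) := by
      rintro ⟨a, b⟩ hm
      obtain ⟨i, hi, hie⟩ := List.mem_iff_getElem.mp hm
      rw [List.getElem_zip] at hie
      have hi' : i < es.length := by rw [hzlen] at hi; omega
      obtain ⟨hlt, ⟨h1, h2, h3, h4⟩, h5⟩ := hgood i hi'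
      rw [List.getD_eq_getElem es 0 hi'] at h1 h2 h5
      rw [List.getD_eq_getElem ee 0 hlt] at h3 h4 h5
      injection hie with ha hb
      subst ha; subst hb
      exact ⟨⟨h1, h2⟩, ⟨h3, h4⟩, h5⟩
    have hnl : ∀ p ∈ es.zip ee, p.1 ≠ p.2 := fun p hp => (hG p hp).2.2
    by_cases hn1 : 1 ≤ n
    · -- n ≥ 1: run the BFS machinery
      have hA2 := adjy_adjOf hG
      have hAred : is_it_a_tree n es ee =
          pvScan (adjOf (es.zip ee) (List.replicate n.toNat []))
            (PySem.List.pyRange 0 n 1)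
            (List.replicate n.toNat 0) (List.replicate n.toNat 0) 0 := by
        simp only [is_it_a_tree]
        rw [pvBuild_eq_some es ee hnl hle (List.replicate n.toNat [])]
      rw [hAred, PySem.List.pyRange_one_cons (by omega : (0:Int) < n)]
      have hg0 : PySem.List.pyGet? (List.replicate n.toNat (0:Int)) 0 = some 0 := by
        have h := pvGetNonneg (List.replicate n.toNat (0:Int)) 0 0 (le_refl 0)
          (by simp; omega)
        rwa [pvRepGetD] at h
      simp only [pvScan, hg0]
      rw [if_pos trivial, if_neg (by omega : ¬ ((0:Int) > 0))]
      rw [show (0:Int) + 1 = 1 from by norm_num]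
      have hspec := pvBfs_spec hG hA2 (List.replicate n.toNat 0)
        (List.replicate n.toNat 0) [0] [] (Or.inr ⟨rfl, hn1, rfl, rfl, rfl⟩)
      set r := pvBfs (adjOf (es.zip ee) (List.replicate n.toNat []))
        (List.replicate n.toNat 0) (List.replicate n.toNat 0) [0] with hr
      by_cases hfired : r.1 = true
      · rw [if_pos hfired]
        have hBE := hspec.1 hfired
        have hBfalse : is_it_a_tree_alt n es ee = false := by
          rcases hBool : is_it_a_tree_alt n es ee with _ | _
          · rfl
          · exfalso
            have hnb := ((alt_spec hn0 hG).mp hBool).1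
            exact noBad_not_badErase hG hnb hBE
        rw [hBfalse]
      · have hf : r.1 = false := by
          rcases hBool : r.1 with _ | _
          · rfl
          · exact absurd hBool hfired
        rw [if_neg (by rw [hf]; exact Bool.false_ne_true)]
        obtain ⟨ordF, hinvF, hsub⟩ := hspec.2 hf
        have hrest := pvScan_rest (n := n)
          (adjOf (es.zip ee) (List.replicate n.toNat []))
          (PySem.List.pyRange 1 n 1) r.2.1 r.2.2 1 (by omega)
          (fun i hi => by
            rw [PySem.List.mem_pyRange_one] at hi
            exact ⟨by omega, hi.2⟩)
          hinvF.hvlen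
        have h0ordF : (0 : Int) ∈ ordF := by
          have := hinvF.hhead
          rw [List.append_nil] at this
          obtain ⟨t, ht⟩ := this
          rw [ht]
          exact List.mem_cons_self
        by_cases hall : ∀ x, InR n x → x ∈ ordF
        · -- every vertex reached and no cycle: both True
          have hmarkall : ∀ i ∈ PySem.List.pyRange 1 n 1, r.2.1.getD i.toNat 0 ≠ 0 := by
            intro i hi
            rw [PySem.List.mem_pyRange_one] at hi
            have hiR : InR n i := ⟨by omega, hi.2⟩
            have h1 := (hinvF.hmark i hiR).mpr (by
              rw [List.append_nil]; exact hall i hiR)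
            omega
          have hcnt := bfs_count hG hinvF hall
          have hAllConn : AllConn n (es.zip ee) := fun x hx =>
            inv_allConn hinvF x (hall x hx)
          have hNB : NoBad (es.zip ee) := by
            by_contra hnb
            have h1 := kap_compOf_bad hG hnb
            have h2 := (allConn_iff_kap_le_one hn1 hG).mp hAllConn
            omega
          have hBtrue : is_it_a_tree_alt n es ee = true := by
            rw [alt_spec hn0 hG]
            refine ⟨hNB, ?_⟩
            omega
          rw [hrest.mpr hmarkall, hBtrue]
        · -- some vertex unreached: both False
          push Not at hall
          obtain ⟨x, hxR, hxno⟩ := hall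
          have hx0 : x ≠ 0 := fun he => hxno (he ▸ h0ordF)
          have hxmem : x ∈ PySem.List.pyRange 1 n 1 := by
            rw [PySem.List.mem_pyRange_one]
            obtain ⟨h1, h2⟩ := hxR
            omega
          have hxunm : r.2.1.getD x.toNat 0 = 0 := by
            rcases hinvF.hbits x.toNat (by obtain ⟨h1, h2⟩ := hxR; omega) with h | h
            · exact h
            · exfalso
              apply hxno
              have := (hinvF.hmark x hxR).mp h
              rwa [List.append_nil] at this
          have hASfalse : pvScan (adjOf (es.zip ee) (List.replicate n.toNat []))
              (PySem.List.pyRange 1 n 1) r.2.1 r.2.2 1 = false := by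
            rcases hsc : pvScan (adjOf (es.zip ee) (List.replicate n.toNat []))
                (PySem.List.pyRange 1 n 1) r.2.1 r.2.2 1 with _ | _
            · rfl
            · exfalso
              exact (hrest.mp hsc) x hxmem hxunm
          have hBfalse : is_it_a_tree_alt n es ee = false := by
            rcases hBool : is_it_a_tree_alt n es ee with _ | _
            · rfl
            · exfalso
              obtain ⟨hNB, hlen2⟩ := (alt_spec hn0 hG).mp hBool
              have h1 := kap_compOf_noBad hG hNB
              have h2 : kap (compOf n (es.zip ee)) ≤ 1 := by omega
              have hAllConn := (allConn_iff_kap_le_one hn1 hG).mpr h2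
              have hconn := hAllConn x hxR
              exact hxno ((conn_ord_closed hinvF 0 x hconn).mp h0ordF)
          rw [hASfalse, hBfalse]
    · -- n = 0: the empty graph is (vacuously) a tree for both
      have hes0 : es = [] := by
        cases hes : es with
        | nil => rfl
        | cons s est =>
          exfalso
          have h1 := (hgood 0 (by rw [hes]; simp)).2.1
          omega
      subst hes0
      have hA : is_it_a_tree n [] ee = true := by
        simp only [is_it_a_tree, pvBuild]
        rw [show PySem.List.pyRange 0 n 1 = [] from
          PySem.List.pyRange_one_eq_nil (by omega)]
        rfl
      have hB : is_it_a_tree_alt n [] ee = true := by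
        rw [is_it_a_tree_alt]
        show pvUF ([].zip ee) (PySem.List.pyRange 0 n 1) n = true
        rw [List.zip_nil_left]
        simp only [pvUF]
        apply decide_eq_true
        omega
      rw [hA, hB]
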